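-- pv_equiv track=rewrite | github.com/ariguz06/lab | main.py | naive_dp_tree_decomposition
-- ===== SOURCE A (Python) =====
-- def dp_vertex_elim(H: dict[int, dict[int, int]], v: int):
--     if v not in H:
--         return
--
--     neighbors = list(H[v].keys())
--
--     #for all pairs (u,w) in N(v), add/relact shortcut edge u-w
--     for i in range(len(neighbors)):
--         u = neighbors[i]
--         for j in range(i + 1, len(neighbors)):
--             w = neighbors[j]
--
--             new_w = H[v][u] + H[v][w]  #adds weight(u,v) and weight(v,w)
--
--             #if edge (u,w) doesnt exist or fond shorter path, update
--             if w not in H[u] or new_w < H[u][w]: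
--                 H[u][w] = new_w
--                 H[w][u] = new_w
--
--     #removes v from H
--     for u in neighbors:
--         if v in H[u]:
--             del H[u][v]
--     del H[v]
--
-- def naive_dp_tree_decomposition(g: dict[int, list[int]]):
--
--     #Copying G into weighted form H with initial weight 1 for each edge
--     H: dict[int, dict[int,int]] = {}
--
--     for u, nbrs in g.items():
--         if u not in H:
--             H[u] = {}
--         for v in nbrs:
--             if v not in H:
--                 H[v] = {}
--
--             if v not in H[u] or H[u][v] > 1:
--                 H[u][v] = 1
--                 H[v][u] = 1
--
--     #initializing containers
--     bags: dict[int, list[int]] = {}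
--     lambdas: dict[int, list[int]] = {}
--     phi: dict[int, int] = {}
--
--     #copy vertex set to avoid issues when mutating H
--     vertices = list(H.keys())
--     n = len(vertices)
--
--     #main eliminatiin loop
--     for i in range(1, n + 1):
--         #pick vertext with smallest degree in H
--         v = min(H.keys(), key=lambda u: len(H[u]))
--
--         #create star X(v) = {v} U N(v, H)
--         neighbors = list(H[v].keys())
--         bag = [v] + neighbors
--
--         lam = [0]
--         for u in neighbors:
--             lam.append(H[v][u])
--
--         bags[v] = bag
--         lambdas[v] = lam
--         phi[v] = i
--
--         #eliminate v with DPVertextElimination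
--         dp_vertex_elim(H, v)
--
--
--     #Assign parents. Parent of X(v) is X(u) where u in X(v)\{v} has smallest phi(u)
--     parent: dict[int, int | None] = {v: None for v in bags.keys()}
--
--     for v, bag in bags.items():
--         if len(bag) > 1:
--             candidates = [u for u in bag if u != v]
--             #All candidates should have phi[u] already set
--             u_parent = min(candidates, key=lambda x:phi[x])
--             parent[v] = u_parent
--         else:
--             parent[v] = None    # Leaf or possible root
--
--     #Sort vertices in each bag in decreasing order of phi and keep lambdas aligned with bags
--     for v in bags.keys():
--         bag = bags[v]
--         lam = lambdas[v]
--         paired = list(zip(bag, lam))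
--         #sort be decreasing phi; -1 if not in phi (shouldnt happen)
--         #paired.sort(key=lambda p: -phi.get(p[0], -1))
--
--         bags[v] = [p[0] for p in paired]
--         lambdas[v] = [p[1] for p in paired]
--
--     return bags, lambdas, parent, phi
-- ===== SOURCE B (Python) =====
-- def naive_dp_tree_decomposition(g: dict[int, list[int]]):
--     # Build unit-weight adjacency; record each vertex's insertion index.
--     adj: dict[int, dict[int, int]] = {}
--     idx: dict[int, int] = {}
--     order: list[int] = []
--     for u, nbrs in g.items():
--         if u not in adj:
--             idx[u] = len(order); order.append(u); adj[u] = {}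
--         for v in nbrs:
--             if v not in adj:
--                 idx[v] = len(order); order.append(v); adj[v] = {}
--             if v not in adj[u]:
--                 adj[u][v] = 1
--                 adj[v][u] = 1
--     n = len(order)
--     deg = {v: len(adj[v]) for v in order}
--
--     # Degree-bucket priority queue with lazy (stale-tolerant) entries.
--     buckets: dict[int, list[tuple[int, int]]] = {}
--     for v in order:
--         buckets.setdefault(deg[v], []).append((idx[v], v))
--     alive = set(order)
--
--     def extract(p: int):
--         # smallest-degree alive vertex, ties by insertion index
--         while True:
--             entries = buckets.get(p, [])
--             best = None
--             for (i, v) in entries: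
--                 if v in alive and deg[v] == p and idx[v] == i:
--                     if best is None or i < best[0]:
--                         best = (i, v)
--             if best is not None:
--                 buckets[p] = [(i, v) for (i, v) in entries
--                               if v in alive and deg[v] == p and v != best[1]]
--                 return best[1], p
--             buckets.pop(p, None)
--             p += 1
--
--     trace: list[tuple[int, list[int], list[int]]] = []
--     p = 0
--     for _ in range(n):
--         v, p = extract(p)
--         nbrs = list(adj[v].keys())
--         ws = [adj[v][u] for u in nbrs]
--         trace.append((v, nbrs, ws))
--         alive.discard(v)
--         # add/relax shortcut edges among the neighbours
--         for k, u in enumerate(nbrs):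
--             for w in nbrs[k + 1:]:
--                 nw = adj[v][u] + adj[v][w]
--                 if w not in adj[u] or nw < adj[u][w]:
--                     if w not in adj[u]:
--                         deg[u] += 1
--                         buckets.setdefault(deg[u], []).append((idx[u], u))
--                         deg[w] += 1
--                         buckets.setdefault(deg[w], []).append((idx[w], w))
--                     adj[u][w] = nw
--                     adj[w][u] = nw
--         for u in nbrs:
--             del adj[u][v]
--             deg[u] -= 1
--             buckets.setdefault(deg[u], []).append((idx[u], u))
--             if deg[u] < p:
--                 p = deg[u]
--         del adj[v]
--         del deg[v]
--
--     # Assemble all four outputs from the trace.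
--     phi: dict[int, int] = {}
--     for i, (v, _, _) in enumerate(trace, 1):
--         phi[v] = i
--     bags: dict[int, list[int]] = {}
--     lambdas: dict[int, list[int]] = {}
--     parent: dict[int, int | None] = {}
--     for v, nbrs, ws in trace:
--         bags[v] = [v] + nbrs
--         lambdas[v] = [0] + ws
--         cand = [u for u in nbrs if u != v]
--         parent[v] = min(cand, key=lambda x: phi[x]) if cand else None
--     return bags, lambdas, parent, phi
-- ===== Notes on version B (the rewrite author's own statement) =====
-- stated objective: alternative
-- what changed: B replaces A's per-step O(n) rescan (min over the mutating dict keyed by row length) and interleaved output dicts by a degree-bucket priority queue with lazy stale entries, an insertion-index tiebreak and incremental degree updates, recording an elimination trace from which all four outputs are assembled afterwards; A's no-op zip rewrite pass disappears.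
import Mathlib
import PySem

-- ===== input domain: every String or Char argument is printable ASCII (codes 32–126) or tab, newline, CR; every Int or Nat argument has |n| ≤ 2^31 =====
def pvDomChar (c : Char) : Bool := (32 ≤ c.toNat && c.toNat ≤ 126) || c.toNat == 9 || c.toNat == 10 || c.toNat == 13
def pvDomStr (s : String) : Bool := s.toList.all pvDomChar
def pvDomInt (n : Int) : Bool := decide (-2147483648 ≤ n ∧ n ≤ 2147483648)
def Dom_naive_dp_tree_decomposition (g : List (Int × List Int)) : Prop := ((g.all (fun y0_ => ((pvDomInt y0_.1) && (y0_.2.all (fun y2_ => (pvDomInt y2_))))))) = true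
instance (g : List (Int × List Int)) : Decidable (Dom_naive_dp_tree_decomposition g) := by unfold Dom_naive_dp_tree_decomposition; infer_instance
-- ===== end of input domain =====

-- B replaces A's per-step rescan of the whole vertex dict (min by row length) by a
-- degree-bucket priority queue with lazy stale entries, an insertion-index tiebreak
-- and incremental degree updates, recording an elimination trace from which all four
-- outputs are assembled afterwards (objective: alternative structure).

-- ===== PORT A =====
def pvRowA (H : PySem.Dict Int (PySem.Dict Int Int)) (u : Int) : PySem.Dict Int Int :=
  H.getD u PySem.Dict.empty

def dp_vertex_elim (H : PySem.Dict Int (PySem.Dict Int Int)) (v : Int) :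
    PySem.Dict Int (PySem.Dict Int Int) :=
  if H.contains v = false then H else
  let neighbors := (pvRowA H v).keys
  let H1 := (PySem.List.pyRange 0 neighbors.length 1).foldl (fun H i =>
      let u := PySem.List.pyGetD neighbors i 0
      (PySem.List.pyRange (i+1) neighbors.length 1).foldl (fun H j =>
        let w := PySem.List.pyGetD neighbors j 0
        let new_w := (pvRowA H v).getD u 0 + (pvRowA H v).getD w 0
        if (pvRowA H u).contains w = false ∨ new_w < (pvRowA H u).getD w 0 then
          let H' := H.insert u ((pvRowA H u).insert w new_w)
          H'.insert w ((pvRowA H' w).insert u new_w)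
        else H) H) H
  let H2 := neighbors.foldl (fun H u =>
      if (pvRowA H u).contains v then H.insert u ((pvRowA H u).erase v) else H) H1
  H2.erase v

def naive_dp_tree_decomposition (g : List (Int × List Int)) :
    (List (Int × List Int)) × (List (Int × List Int)) × (List (Int × Option Int)) × (List (Int × Int)) :=
  let H := g.foldl (fun H p =>
      let u := p.1
      let H := if H.contains u = false then H.insert u PySem.Dict.empty else H
      p.2.foldl (fun H v =>
        let H := if H.contains v = false then H.insert v PySem.Dict.empty else H
        if (pvRowA H u).contains v = false ∨ 1 < (pvRowA H u).getD v 0 then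
          let H' := H.insert u ((pvRowA H u).insert v 1)
          H'.insert v ((pvRowA H' v).insert u 1)
        else H) H) (PySem.Dict.empty)
  let vertices := H.keys
  let n := vertices.length
  let st := (PySem.List.pyRange 1 ((n : Int)+1) 1).foldl (fun st i =>
      match PySem.List.min? st.1.keys (fun u => ((st.1.getD u PySem.Dict.empty).size : Int)) with
      | none => st   -- unreachable: Python's min would raise on an empty dict
      | some v =>
        let neighbors := (pvRowA st.1 v).keys
        let bag := v :: neighbors
        let lam := neighbors.foldl (fun lam u => lam ++ [(pvRowA st.1 v).getD u 0]) [(0:Int)]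
        (dp_vertex_elim st.1 v, st.2.1.insert v bag, st.2.2.1.insert v lam, st.2.2.2.insert v i))
    (H, (PySem.Dict.empty : PySem.Dict Int (List Int)),
        (PySem.Dict.empty : PySem.Dict Int (List Int)),
        (PySem.Dict.empty : PySem.Dict Int Int))
  let bags := st.2.1
  let lambdas := st.2.2.1
  let phi := st.2.2.2
  let parent := bags.keys.foldl (fun par v => par.insert v (none : Option Int))
      (PySem.Dict.empty : PySem.Dict Int (Option Int))
  let parent := bags.items.foldl (fun par p =>
      let v := p.1
      let bag := p.2
      if 1 < bag.length then
        let candidates := bag.filter (fun u => u != v)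
        match PySem.List.min? candidates (fun x => phi.getD x 0) with
        | some up => par.insert v (some up)
        | none => par.insert v none   -- unreachable: Python raises ValueError here
      else par.insert v none) parent
  let bl := bags.keys.foldl (fun bl v =>
      let bag := bl.1.getD v []
      let lam := bl.2.getD v []
      let paired := bag.zip lam
      (bl.1.insert v (paired.map Prod.fst), bl.2.insert v (paired.map Prod.snd)))
    (bags, lambdas)
  (bl.1.items, bl.2.items, parent.items, phi.items)

-- ===== PORT B =====
def pvRowB (adj : PySem.Dict Int (PySem.Dict Int Int)) (u : Int) : PySem.Dict Int Int :=
  adj.getD u PySem.Dict.empty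

-- buckets.setdefault(d, []).append(e)
def pvBApp (b : PySem.Dict Int (List (Int × Int))) (d : Int) (e : Int × Int) :
    PySem.Dict Int (List (Int × Int)) :=
  b.insert d (b.getD d [] ++ [e])

-- Source B's extract(): 'while True' pivot search over the degree buckets; the fuel
-- argument bounds the loop (callers pass alive.length + 1, which always suffices —
-- proved below; Python's while-loop terminates for the same reason)
def pvExtractB (alive : PySem.Set Int) (deg idx : PySem.Dict Int Int) :
    Nat → PySem.Dict Int (List (Int × Int)) → Int →
      Option (Int × Int × PySem.Dict Int (List (Int × Int)))
  | 0, _, _ => none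
  | fuel+1, buckets, p =>
    let entries := buckets.getD p []
    let best := entries.foldl (fun best e =>
        if PySem.Set.contains alive e.2 && (deg.getD e.2 0 == p) && (idx.getD e.2 0 == e.1) then
          match best with
          | none => some e
          | some b => if e.1 < b.1 then some e else some b
        else best) none
    match best with
    | some b => some (b.2, p, buckets.insert p (entries.filter
        (fun e => PySem.Set.contains alive e.2 && (deg.getD e.2 0 == p) && e.2 != b.2)))
    | none => pvExtractB alive deg idx fuel (buckets.erase p) (p+1)

-- one shortcut-edge update of the fill loop, with incremental degree/bucket updates
def pvFillB (idx : PySem.Dict Int Int) (v : Int)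
    (s : PySem.Dict Int (PySem.Dict Int Int) × PySem.Dict Int Int × PySem.Dict Int (List (Int × Int)))
    (u w : Int) :
    PySem.Dict Int (PySem.Dict Int Int) × PySem.Dict Int Int × PySem.Dict Int (List (Int × Int)) :=
  let nw := (pvRowB s.1 v).getD u 0 + (pvRowB s.1 v).getD w 0
  if (pvRowB s.1 u).contains w = false ∨ nw < (pvRowB s.1 u).getD w 0 then
    let s' :=
      if (pvRowB s.1 u).contains w = false then
        let deg1 := s.2.1.insert u (s.2.1.getD u 0 + 1)
        let bk1 := pvBApp s.2.2 (deg1.getD u 0) (idx.getD u 0, u)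
        let deg2 := deg1.insert w (deg1.getD w 0 + 1)
        let bk2 := pvBApp bk1 (deg2.getD w 0) (idx.getD w 0, w)
        (s.1, deg2, bk2)
      else s
    let adj1 := s'.1.insert u ((pvRowB s'.1 u).insert w nw)
    (adj1.insert w ((pvRowB adj1 w).insert u nw), s'.2.1, s'.2.2)
  else s

-- one iteration of the main elimination loop (the loop variable is unused in Source B)
def pvStepB (idx : PySem.Dict Int Int)
    (st : PySem.Dict Int (PySem.Dict Int Int) × PySem.Dict Int Int ×
          PySem.Dict Int (List (Int × Int)) × Int × PySem.Set Int ×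
          List (Int × List Int × List Int)) (_i : Int) :
    PySem.Dict Int (PySem.Dict Int Int) × PySem.Dict Int Int ×
      PySem.Dict Int (List (Int × Int)) × Int × PySem.Set Int ×
      List (Int × List Int × List Int) :=
  match pvExtractB st.2.2.2.2.1 st.2.1 idx (st.2.2.2.2.1.length + 1) st.2.2.1 st.2.2.2.1 with
  | none => st   -- unreachable: extract always returns (see pvExtract_spec)
  | some (v, p1, bk1) =>
    let nbrs := (pvRowB st.1 v).keys
    let ws := nbrs.map (fun u => (pvRowB st.1 v).getD u 0)
    let trace := st.2.2.2.2.2 ++ [(v, nbrs, ws)]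
    let alive := PySem.Set.discard st.2.2.2.2.1 v
    let s3 := (PySem.List.enumerate nbrs 0).foldl (fun s3 q =>
        (PySem.List.slice nbrs (some (q.1+1)) none).foldl
          (fun s3 w => pvFillB idx v s3 q.2 w) s3) (st.1, st.2.1, bk1)
    let s4 := nbrs.foldl (fun s4 u =>
        let adj := s4.1.insert u ((pvRowB s4.1 u).erase v)
        let deg := s4.2.1.insert u (s4.2.1.getD u 0 - 1)
        let bk := pvBApp s4.2.2.1 (deg.getD u 0) (idx.getD u 0, u)
        let p := if deg.getD u 0 < s4.2.2.2 then deg.getD u 0 else s4.2.2.2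
        (adj, deg, bk, p)) (s3.1, s3.2.1, s3.2.2, p1)
    (s4.1.erase v, s4.2.1.erase v, s4.2.2.1, s4.2.2.2, alive, trace)

-- vertex registration of the build loop (assigns the insertion index)
def pvRegB (s : PySem.Dict Int (PySem.Dict Int Int) × PySem.Dict Int Int × List Int) (x : Int) :
    PySem.Dict Int (PySem.Dict Int Int) × PySem.Dict Int Int × List Int :=
  if s.1.contains x = false then
    (s.1.insert x PySem.Dict.empty, s.2.1.insert x (s.2.2.length : Int), s.2.2 ++ [x])
  else s

def pvEdgeB (u : Int) (s : PySem.Dict Int (PySem.Dict Int Int) × PySem.Dict Int Int × List Int)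
    (v : Int) : PySem.Dict Int (PySem.Dict Int Int) × PySem.Dict Int Int × List Int :=
  let s := pvRegB s v
  if (pvRowB s.1 u).contains v = false then
    let adj1 := s.1.insert u ((pvRowB s.1 u).insert v 1)
    (adj1.insert v ((pvRowB adj1 v).insert u 1), s.2.1, s.2.2)
  else s

def pvBuildStepB (s : PySem.Dict Int (PySem.Dict Int Int) × PySem.Dict Int Int × List Int)
    (pr : Int × List Int) :
    PySem.Dict Int (PySem.Dict Int Int) × PySem.Dict Int Int × List Int :=
  pr.2.foldl (pvEdgeB pr.1) (pvRegB s pr.1)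

def naive_dp_tree_decomposition_alt (g : List (Int × List Int)) :
    (List (Int × List Int)) × (List (Int × List Int)) × (List (Int × Option Int)) × (List (Int × Int)) :=
  let s := g.foldl pvBuildStepB
    ((PySem.Dict.empty : PySem.Dict Int (PySem.Dict Int Int)),
     (PySem.Dict.empty : PySem.Dict Int Int), ([] : List Int))
  let adj := s.1
  let idx := s.2.1
  let order := s.2.2
  let n := order.length
  let deg := order.foldl (fun d v => d.insert v ((pvRowB adj v).size : Int))
      (PySem.Dict.empty : PySem.Dict Int Int)
  let buckets := order.foldl (fun b v => pvBApp b (deg.getD v 0) (idx.getD v 0, v))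
      (PySem.Dict.empty : PySem.Dict Int (List (Int × Int)))
  let alive := PySem.Set.ofList order
  let fin := (PySem.List.pyRange 0 (n : Int) 1).foldl (pvStepB idx)
      (adj, deg, buckets, (0 : Int), alive, ([] : List (Int × List Int × List Int)))
  let trace := fin.2.2.2.2.2
  let phi := (PySem.List.enumerate trace 1).foldl (fun phi p => phi.insert p.2.1 p.1)
      (PySem.Dict.empty : PySem.Dict Int Int)
  let blp := trace.foldl (fun blp t =>
      let cand := t.2.1.filter (fun u => u != t.1)
      (blp.1.insert t.1 (t.1 :: t.2.1), blp.2.1.insert t.1 ((0:Int) :: t.2.2),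
       blp.2.2.insert t.1 (PySem.List.min? cand (fun x => phi.getD x 0))))
    ((PySem.Dict.empty : PySem.Dict Int (List Int)),
     (PySem.Dict.empty : PySem.Dict Int (List Int)),
     (PySem.Dict.empty : PySem.Dict Int (Option Int)))
  (blp.1.items, blp.2.1.items, blp.2.2.items, phi.items)

-- ===== PRECONDITION & SPEC =====
-- Pre_ excludes graphs with a self-loop: on some of those A raises ValueError
-- (min() of an empty candidate list when an eliminated vertex's only remaining
-- neighbour is itself), and whether it does depends on the whole elimination
-- run, so the closed-form condition excludes all self-loop graphs.
def Pre_naive_dp_tree_decomposition (g : List (Int × List Int)) : Prop :=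
  ∀ p ∈ g, p.1 ∉ p.2
instance (g : List (Int × List Int)) : Decidable (Pre_naive_dp_tree_decomposition g) := by
  unfold Pre_naive_dp_tree_decomposition; infer_instance

def pvWitness_naive_dp_tree_decomposition : (List (Int × List Int)) :=
  [(1, [2, 3]), (2, [3]), (4, [1])]

def Spec_naive_dp_tree_decomposition (g : List (Int × List Int)) (out : (List (Int × List Int)) × (List (Int × List Int)) × (List (Int × Option Int)) × (List (Int × Int))) : Prop := out = naive_dp_tree_decomposition_alt g
instance (g : List (Int × List Int)) (out : (List (Int × List Int)) × (List (Int × List Int)) × (List (Int × Option Int)) × (List (Int × Int))) : Decidable (Spec_naive_dp_tree_decomposition g out) := by unfold Spec_naive_dp_tree_decomposition; infer_instance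

-- ===== CLAIM (what is proved, stated in full; the proofs are below) =====
def Claim_equal_naive_dp_tree_decomposition : Prop := ∀ (g : List (Int × List Int)), Dom_naive_dp_tree_decomposition g → Pre_naive_dp_tree_decomposition g → Spec_naive_dp_tree_decomposition g (naive_dp_tree_decomposition g)

-- ===== LEMMAS AND PROOFS =====

-- ---- generic list/dict utilities ----

theorem pvDict_get?_erase_of_ne {κ ν : Type} [BEq κ] [LawfulBEq κ]
    (d : PySem.Dict κ ν) {k k' : κ} (h : k' ≠ k) :
    (d.erase k).get? k' = d.get? k' := by
  simp only [PySem.Dict.erase, PySem.Dict.get?, List.find?_filter]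
  have hfg : (fun a : κ × ν => decide ((!a.1 == k) = true ∧ (a.1 == k') = true))
      = (fun p : κ × ν => p.1 == k') := by
    funext p
    by_cases hp : p.1 = k'
    · simp [hp, h]
    · simp [hp]
  rw [hfg]

theorem pvDict_getD_erase_of_ne {κ ν : Type} [BEq κ] [LawfulBEq κ]
    (d : PySem.Dict κ ν) {k k' : κ} (d0 : ν) (h : k' ≠ k) :
    (d.erase k).getD k' d0 = d.getD k' d0 := by
  simp [PySem.Dict.getD, pvDict_get?_erase_of_ne d h]

theorem pvDict_keys_erase {κ ν : Type} [BEq κ]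
    (d : PySem.Dict κ ν) (k : κ) :
    (d.erase k).keys = d.keys.filter (fun x => !(x == k)) := by
  simp [PySem.Dict.erase, PySem.Dict.keys, List.filter_map, Function.comp_def]

theorem pvDict_contains_erase {κ ν : Type} [BEq κ] [LawfulBEq κ] [DecidableEq κ]
    (d : PySem.Dict κ ν) (k k' : κ) :
    (d.erase k).contains k' = (!(k' == k) && d.contains k') := by
  rw [PySem.Dict.contains_eq_decide_mem_keys, PySem.Dict.contains_eq_decide_mem_keys,
    pvDict_keys_erase]
  by_cases h : k' = k <;> simp [h, List.mem_filter]

theorem pvDict_size_erase {κ ν : Type} [BEq κ] [LawfulBEq κ]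
    (d : PySem.Dict κ ν) (k : κ) (hnd : d.keys.Nodup) (hc : d.contains k = true) :
    ((d.erase k).size : Int) = (d.size : Int) - 1 := by
  have hk : k ∈ d.keys := (PySem.Dict.contains_iff_mem_keys d k).1 hc
  have hcount : List.countP (fun p : κ × ν => p.1 == k) d.items = 1 := by
    have := List.count_eq_one_of_mem hnd hk
    simpa [PySem.Dict.keys, List.count, List.countP_map, Function.comp_def] using this
  have hsplit : d.items.length = List.countP (fun p : κ × ν => p.1 == k) d.items
      + List.countP (fun p : κ × ν => !(p.1 == k)) d.items := by
    have h0 := List.length_eq_countP_add_countP (p := fun p : κ × ν => p.1 == k) (l := d.items)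
    rw [h0]
    congr 1
    apply List.countP_congr
    intro a _
    by_cases hak : a.1 = k <;> simp [hak]
  have hlen : (d.erase k).size = List.countP (fun p : κ × ν => !(p.1 == k)) d.items := by
    simp [PySem.Dict.erase, PySem.Dict.size, List.countP_eq_length_filter]
  have hsz : d.size = d.items.length := rfl
  omega

theorem pvDict_insert_eq_self {κ ν : Type} [BEq κ] [LawfulBEq κ]
    (d : PySem.Dict κ ν) (k : κ) (v : ν) (hnd : d.keys.Nodup) (h : d.get? k = some v) :
    d.insert k v = d := by
  have hc : d.contains k = true := by rw [PySem.Dict.contains_eq_isSome_get?, h]; rfl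
  apply PySem.Dict.ext
  rw [PySem.Dict.items_insert_of_contains d v hc]
  conv_rhs => rw [← List.map_id d.items]
  apply List.map_congr_left
  intro p hp
  by_cases hpk : p.1 = k
  · have hpi : (k, p.2) ∈ d.items := by
      have : p = (k, p.2) := by cases p; simp_all
      rwa [this] at hp
    have := PySem.Dict.get?_of_mem_items d hpi hnd
    rw [h] at this
    cases p
    simp_all
  · simp [hpk]

theorem pvMin?_aux {α κ : Type} [LT κ] [DecidableLT κ]
    (f g : α → κ) : ∀ (xs : List α) (acc : Option α),
    (∀ x ∈ xs, f x = g x) → (∀ m, acc = some m → f m = g m) →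
    xs.foldl (fun acc x => match acc with
      | none => some x
      | some m => if f x < f m then some x else some m) acc
    = xs.foldl (fun acc x => match acc with
      | none => some x
      | some m => if g x < g m then some x else some m) acc := by
  intro xs
  induction xs with
  | nil => intro acc _ _; rfl
  | cons x t ih =>
      intro acc hx hacc
      have hfx : f x = g x := hx x (by simp)
      cases acc with
      | none =>
          simp only [List.foldl_cons]
          exact ih (some x) (fun y hy => hx y (by simp [hy]))
            (fun m hm => by cases hm; exact hfx)
      | some m0 =>
          have hm0 : f m0 = g m0 := hacc m0 rfl
          simp only [List.foldl_cons]
          rw [hfx, hm0]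
          apply ih _ (fun y hy => hx y (by simp [hy]))
          intro m hm
          split at hm <;> (cases hm; first | exact hfx | exact hm0)

theorem pvMin?_congr {α κ : Type} [LT κ] [DecidableLT κ]
    (xs : List α) (f g : α → κ) (h : ∀ x ∈ xs, f x = g x) :
    PySem.List.min? xs f = PySem.List.min? xs g := by
  unfold PySem.List.min?
  exact pvMin?_aux f g xs none h (by intro m hm; cases hm)

theorem pvFoldl_fst {α σ τ : Type} (l : List α) (f : σ → α → σ) (g : σ × τ → α → σ × τ)
    (h : ∀ s a, (g s a).1 = f s.1 a) : ∀ s : σ × τ, (l.foldl g s).1 = l.foldl f s.1 := by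
  induction l with
  | nil => intro s; rfl
  | cons x t ih => intro s; simpa [h s x] using ih (g s x)

theorem pvFoldl_snd {α σ τ : Type} (l : List α) (f : τ → α → τ) (g : σ × τ → α → σ × τ)
    (h : ∀ s a, (g s a).2 = f s.2 a) : ∀ s : σ × τ, (l.foldl g s).2 = l.foldl f s.2 := by
  induction l with
  | nil => intro s; rfl
  | cons x t ih => intro s; simpa [h s x] using ih (g s x)

theorem pvFoldl_id {α σ : Type} (l : List α) (f : σ → α → σ) (s : σ)
    (h : ∀ a ∈ l, f s a = s) : l.foldl f s = s := by
  induction l with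
  | nil => rfl
  | cons x t ih =>
      simp only [List.foldl_cons, h x (by simp)]
      exact ih (fun a ha => h a (by simp [ha]))

def pvPairs : List Int → List (Int × Int)
  | [] => []
  | x :: t => (t.map (fun w => (x, w))) ++ pvPairs t

theorem pvPairs_mem {l : List Int} (hnd : l.Nodup) :
    ∀ p ∈ pvPairs l, p.1 ∈ l ∧ p.2 ∈ l ∧ p.1 ≠ p.2 := by
  induction l with
  | nil => intro p hp; cases hp
  | cons x t ih =>
      intro p hp
      rcases List.mem_append.1 hp with hl | hr
      · rcases List.mem_map.1 hl with ⟨w, hw, rfl⟩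
        refine ⟨by simp, by simp [hw], ?_⟩
        intro hxw
        simp only at hxw
        exact (List.nodup_cons.1 hnd).1 (hxw ▸ hw)
      · obtain ⟨h1, h2, h3⟩ := ih (List.nodup_cons.1 hnd).2 p hr
        exact ⟨by simp [h1], by simp [h2], h3⟩

theorem pvFoldl_append_map {α : Type} (l : List α) (f : α → Int) :
    ∀ init : List Int, l.foldl (fun acc u => acc ++ [f u]) init = init ++ l.map f := by
  induction l with
  | nil => intro init; simp
  | cons x t ih => intro init; simp [ih]

theorem pvContains_false_of_not_mem {κ ν : Type} [BEq κ] [LawfulBEq κ]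
    (d : PySem.Dict κ ν) {k : κ} (h : k ∉ d.keys) : d.contains k = false := by
  cases hc : d.contains k
  · rfl
  · exact absurd ((PySem.Dict.contains_iff_mem_keys d k).1 hc) h

theorem pvRow_insert (H : PySem.Dict Int (PySem.Dict Int Int)) (u : Int) (r : PySem.Dict Int Int)
    (a : Int) : pvRowA (H.insert u r) a = if a = u then r else pvRowA H a := by
  simp [pvRowA, PySem.Dict.getD_insert]

theorem pvRow_not_mem (H : PySem.Dict Int (PySem.Dict Int Int)) {a : Int} (h : a ∉ H.keys) :
    pvRowA H a = PySem.Dict.empty :=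
  PySem.Dict.getD_of_not_contains H _ (pvContains_false_of_not_mem H h)

theorem pvRow_mem_of_contains (H : PySem.Dict Int (PySem.Dict Int Int)) {a b : Int}
    (h : (pvRowA H a).contains b = true) : a ∈ H.keys := by
  by_contra hn
  rw [pvRow_not_mem H hn] at h
  simp [PySem.Dict.contains_empty] at h

theorem pvRow_erase (H : PySem.Dict Int (PySem.Dict Int Int)) (v : Int) {a : Int} (h : a ≠ v) :
    pvRowA (H.erase v) a = pvRowA H a :=
  pvDict_getD_erase_of_ne H _ h

theorem pvRow_erase_self (H : PySem.Dict Int (PySem.Dict Int Int)) (v : Int) :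
    pvRowA (H.erase v) v = PySem.Dict.empty := by
  apply PySem.Dict.getD_of_not_contains
  rw [pvDict_contains_erase]
  simp

theorem pvDict_nodup_keys_erase {κ ν : Type} [BEq κ]
    (d : PySem.Dict κ ν) (k : κ) (h : d.keys.Nodup) : (d.erase k).keys.Nodup := by
  rw [pvDict_keys_erase]; exact h.filter _

-- ---- pair-iteration canonicalisation ----

theorem pvFoldA_pairs {σ : Type} (step : σ → Int → Int → σ) :
    ∀ (l : List Int) (s : σ),
    (PySem.List.pyRange 0 l.length 1).foldl (fun s i =>
      (PySem.List.pyRange (i+1) l.length 1).foldl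
        (fun s j => step s (PySem.List.pyGetD l i 0) (PySem.List.pyGetD l j 0)) s) s
    = (pvPairs l).foldl (fun s p => step s p.1 p.2) s := by
  intro l
  induction l with
  | nil => intro s; rw [PySem.List.pyRange_one_eq_nil (by simp)]; rfl
  | cons x t ih =>
      intro s
      rw [PySem.List.pyRange_one_cons (by simp)]
      rw [List.foldl_cons]
      have h0 : PySem.List.pyGetD (x :: t) 0 0 = x := by
        simpa using PySem.List.pyGetD_natCast (x :: t) 0 0
      have hinner : (PySem.List.pyRange (0+1) (x :: t).length 1).foldl
          (fun s j => step s (PySem.List.pyGetD (x :: t) 0 0) (PySem.List.pyGetD (x :: t) j 0)) s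
          = t.foldl (fun s w => step s x w) s := by
        rw [h0]
        have := PySem.List.foldl_pyRange_pyGetD' (x :: t) 0
          (fun s w => step s x w) s (a := 1) (by norm_num)
        simpa using this
      rw [hinner]
      have houter : (PySem.List.pyRange 1 (x :: t).length 1).foldl (fun s i =>
          (PySem.List.pyRange (i+1) (x :: t).length 1).foldl
            (fun s j => step s (PySem.List.pyGetD (x :: t) i 0) (PySem.List.pyGetD (x :: t) j 0)) s)
            (t.foldl (fun s w => step s x w) s)
          = (PySem.List.pyRange 0 t.length 1).foldl (fun s i =>
          (PySem.List.pyRange (i+1) t.length 1).foldl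
            (fun s j => step s (PySem.List.pyGetD t i 0) (PySem.List.pyGetD t j 0)) s)
            (t.foldl (fun s w => step s x w) s) := by
        rw [PySem.List.pyRange_one 1 ((x :: t).length : Int),
          PySem.List.pyRange_one 0 (t.length : Int)]
        have hlen : (((x :: t).length : Int) - 1).toNat = ((t.length : Int) - 0).toNat := by
          simp
        rw [hlen, List.foldl_map, List.foldl_map]
        apply PySem.List.foldl_congr_mem
        intro acc k hk
        have hk' : k < t.length := by
          have := List.mem_range.1 hk
          omega
        have hu : PySem.List.pyGetD (x :: t) (1 + (k : Int)) 0 = PySem.List.pyGetD t (0 + (k : Int)) 0 := by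
          have h1 : (1 + (k : Int)) = ((k + 1 : Nat) : Int) := by push_cast; ring
          have h2 : (0 + (k : Int)) = ((k : Nat) : Int) := by push_cast; ring
          rw [h1, h2, PySem.List.pyGetD_natCast, PySem.List.pyGetD_natCast]
          rfl
        have hj : ∀ s' : σ, (PySem.List.pyRange (1 + (k : Int) + 1) ((x :: t).length : Int) 1).foldl
            (fun s j => step s (PySem.List.pyGetD (x :: t) (1 + (k : Int)) 0) (PySem.List.pyGetD (x :: t) j 0)) s'
            = (PySem.List.pyRange (0 + (k : Int) + 1) ((t.length : Int)) 1).foldl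
            (fun s j => step s (PySem.List.pyGetD t (0 + (k : Int)) 0) (PySem.List.pyGetD t j 0)) s' := by
          intro s'
          rw [hu]
          have hA := PySem.List.foldl_pyRange_pyGetD' (x :: t) 0
            (fun s w => step s (PySem.List.pyGetD t (0 + (k : Int)) 0) w) s' (a := 1 + (k : Int) + 1)
            (by positivity)
          have hB := PySem.List.foldl_pyRange_pyGetD' t 0
            (fun s w => step s (PySem.List.pyGetD t (0 + (k : Int)) 0) w) s' (a := 0 + (k : Int) + 1)
            (by positivity)
          rw [hA, hB]
          congr 1
          have h1 : (1 + (k : Int) + 1).toNat = k + 2 := by omega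
          have h2 : (0 + (k : Int) + 1).toNat = k + 1 := by omega
          rw [h1, h2]
          rfl
        rw [hj]
      have h01 : (0 : Int) + 1 = 1 := by norm_num
      rw [h01, houter, ih (t.foldl (fun s w => step s x w) s)]
      simp [pvPairs, List.foldl_append, List.foldl_map]

theorem pvFoldB_aux {σ : Type} (step : σ → Int → Int → σ) (full : List Int) :
    ∀ (d : List Int) (a : Nat), full.drop a = d → ∀ s : σ,
    (PySem.List.enumerate d a).foldl (fun s p =>
      (PySem.List.slice full (some (p.1+1)) none).foldl (fun s w => step s p.2 w) s) s
    = (pvPairs d).foldl (fun s p => step s p.1 p.2) s := by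
  intro d
  induction d with
  | nil => intro a _ s; rfl
  | cons x rest ih =>
      intro a hdrop s
      have hcons : PySem.List.enumerate (x :: rest) (a : Int)
          = ((a : Int), x) :: PySem.List.enumerate rest ((a : Int)+1) := rfl
      rw [hcons, List.foldl_cons]
      have hslice : PySem.List.slice full (some ((a : Int)+1)) none = rest := by
        rw [PySem.List.slice_from full (by positivity)]
        have : ((a : Int) + 1).toNat = a + 1 := by omega
        rw [this]
        have : full.drop (a + 1) = (full.drop a).drop 1 := by
          rw [List.drop_drop]
        rw [this, hdrop]
        rfl
      rw [hslice]
      have hrest : full.drop (a + 1) = rest := by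
        have : full.drop (a + 1) = (full.drop a).drop 1 := by rw [List.drop_drop]
        rw [this, hdrop]; rfl
      have hcast : (a : Int) + 1 = ((a + 1 : Nat) : Int) := by push_cast; ring
      rw [hcast]
      rw [ih (a+1) hrest]
      simp [pvPairs, List.foldl_append, List.foldl_map]

theorem pvFoldB_pairs {σ : Type} (step : σ → Int → Int → σ) (l : List Int) (s : σ) :
    (PySem.List.enumerate l 0).foldl (fun s p =>
      (PySem.List.slice l (some (p.1+1)) none).foldl (fun s w => step s p.2 w) s) s
    = (pvPairs l).foldl (fun s p => step s p.1 p.2) s := by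
  have := pvFoldB_aux step l l 0 (by simp) s
  simpa using this

-- ---- the adjacency invariant ----

def pvInv (H : PySem.Dict Int (PySem.Dict Int Int)) (deg : PySem.Dict Int Int) : Prop :=
  H.keys.Nodup ∧
  (∀ u ∈ H.keys, deg.getD u 0 = ((pvRowA H u).size : Int)) ∧
  (∀ a b : Int, (pvRowA H a).contains b = (pvRowA H b).contains a) ∧
  (∀ a b : Int, (pvRowA H a).contains b = true → b ∈ H.keys) ∧
  (∀ a : Int, (pvRowA H a).keys.Nodup) ∧
  (∀ a : Int, (pvRowA H a).contains a = false)

def pvStepPairA (v : Int) (H : PySem.Dict Int (PySem.Dict Int Int)) (u w : Int) :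
    PySem.Dict Int (PySem.Dict Int Int) :=
  let new_w := (pvRowA H v).getD u 0 + (pvRowA H v).getD w 0
  if (pvRowA H u).contains w = false ∨ new_w < (pvRowA H u).getD w 0 then
    let H' := H.insert u ((pvRowA H u).insert w new_w)
    H'.insert w ((pvRowA H' w).insert u new_w)
  else H

def pvDelStepA (v : Int) (H : PySem.Dict Int (PySem.Dict Int Int)) (u : Int) :
    PySem.Dict Int (PySem.Dict Int Int) :=
  if (pvRowA H u).contains v then H.insert u ((pvRowA H u).erase v) else H

theorem pvRowB_eq : @pvRowB = @pvRowA := rfl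

-- ---- bucket helpers ----

theorem pvBApp_getD (b : PySem.Dict Int (List (Int × Int))) (d d' : Int) (e : Int × Int) :
    (pvBApp b d e).getD d' [] = if d' = d then b.getD d [] ++ [e] else b.getD d' [] := by
  simp [pvBApp, PySem.Dict.getD_insert]

theorem pvBApp_mono (b : PySem.Dict Int (List (Int × Int))) (d d' : Int) (e e' : Int × Int)
    (h : e ∈ b.getD d [] ) : e ∈ (pvBApp b d' e').getD d [] := by
  rw [pvBApp_getD]
  split_ifs with hd
  · subst hd; exact List.mem_append.2 (Or.inl h)
  · exact h

theorem pvBApp_self (b : PySem.Dict Int (List (Int × Int))) (d : Int) (e : Int × Int) :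
    e ∈ (pvBApp b d e).getD d [] := by
  rw [pvBApp_getD, if_pos rfl]
  simp

-- ---- 'first minimal element' characterisation of Python's min ----

theorem pvMinFold_keep {α κ : Type} [LinearOrder κ] (f : α → κ) (m : α) :
    ∀ (l : List α), (∀ x ∈ l, f m ≤ f x) →
    l.foldl (fun acc x => match acc with
      | none => some x
      | some m' => if f x < f m' then some x else some m') (some m) = some m := by
  intro l
  induction l with
  | nil => intro _; rfl
  | cons x t ih =>
      intro h
      have hx : ¬ f x < f m := not_lt.2 (h x (by simp))
      simp only [List.foldl_cons, if_neg hx]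
      exact ih (fun y hy => h y (by simp [hy]))

theorem pvMinFold_found {α : Type} (f pos : α → Int) (v : α) :
    ∀ (t : List α) (a : α), v ∈ t → f v < f a → (∀ y ∈ t, f v ≤ f y) →
    (∀ y ∈ t, f y = f v → pos v ≤ pos y) → t.Pairwise (fun a b => pos a < pos b) →
    t.foldl (fun acc x => match acc with
      | none => some x
      | some m' => if f x < f m' then some x else some m') (some a) = some v := by
  intro t
  induction t with
  | nil => intro a hv; cases hv
  | cons y t ih =>
      intro a hv hlt hmin htie hpw
      by_cases hyv : y = v
      · subst hyv
        simp only [List.foldl_cons, if_pos hlt]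
        exact pvMinFold_keep f y t (fun z hz => hmin z (by simp [hz]))
      · have hvt : v ∈ t := by
          rcases List.mem_cons.1 hv with h | h
          · exact absurd h.symm hyv
          · exact h
        have hfy : f v < f y := by
          rcases lt_or_eq_of_le (hmin y (by simp)) with h | h
          · exact h
          · exfalso
            have h1 := htie y (by simp) h.symm
            have h2 := (List.pairwise_cons.1 hpw).1 v hvt
            omega
        simp only [List.foldl_cons]
        split_ifs with hcmp
        · exact ih y hvt hfy (fun z hz => hmin z (by simp [hz]))
            (fun z hz he => htie z (by simp [hz]) he) (List.pairwise_cons.1 hpw).2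
        · exact ih a hvt hlt (fun z hz => hmin z (by simp [hz]))
            (fun z hz he => htie z (by simp [hz]) he) (List.pairwise_cons.1 hpw).2

theorem pvMin?_first {α : Type} (f pos : α → Int) (l : List α) (v : α)
    (hpw : l.Pairwise (fun a b => pos a < pos b)) (hv : v ∈ l)
    (hmin : ∀ x ∈ l, f v ≤ f x) (htie : ∀ x ∈ l, f x = f v → pos v ≤ pos x) :
    PySem.List.min? l f = some v := by
  cases l with
  | nil => cases hv
  | cons x t =>
      show (x :: t).foldl _ none = some v
      simp only [List.foldl_cons]
      by_cases hxv : x = v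
      · subst hxv
        exact pvMinFold_keep f x t (fun z hz => hmin z (by simp [hz]))
      · have hvt : v ∈ t := by
          rcases List.mem_cons.1 hv with h | h
          · exact absurd h.symm hxv
          · exact h
        have hfx : f v < f x := by
          rcases lt_or_eq_of_le (hmin x (by simp)) with h | h
          · exact h
          · exfalso
            have h1 := htie x (by simp) h.symm
            have h2 := (List.pairwise_cons.1 hpw).1 v hvt
            omega
        exact pvMinFold_found f pos v t x hvt hfx (fun z hz => hmin z (by simp [hz]))
          (fun z hz he => htie z (by simp [hz]) he) (List.pairwise_cons.1 hpw).2

-- ---- the best-entry scan of extract() ----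

theorem pvBest_some_ne_none {α : Type} (step : Option α → α → Option α)
    (hstep : ∀ b a, ∃ m, step (some b) a = some m) :
    ∀ (l : List α) (b : α), ∃ m, l.foldl step (some b) = some m := by
  intro l
  induction l with
  | nil => intro b; exact ⟨b, rfl⟩
  | cons x t ih =>
      intro b
      obtain ⟨m, hm⟩ := hstep b x
      simp only [List.foldl_cons, hm]
      exact ih m

theorem pvBestFold_none (pass : Int × Int → Bool) :
    ∀ (l : List (Int × Int)),
    l.foldl (fun best e =>
        if pass e then
          match best with
          | none => some e
          | some b => if e.1 < b.1 then some e else some b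
        else best) none = none → ∀ e ∈ l, pass e = false := by
  intro l
  induction l with
  | nil => intro _ e he; cases he
  | cons x t ih =>
      intro h e he
      by_cases hx : pass x = true
      · exfalso
        simp only [List.foldl_cons, if_pos hx] at h
        obtain ⟨m, hm⟩ := pvBest_some_ne_none (fun best e =>
            if pass e then
              match best with
              | none => some e
              | some b => if e.1 < b.1 then some e else some b
            else best)
          (fun b a => by
            by_cases hp : pass a = true
            · simp only [if_pos hp]
              split_ifs <;> exact ⟨_, rfl⟩
            · exact ⟨b, by simp [hp]⟩) t x
        rw [hm] at h
        cases h
      · rcases List.mem_cons.1 he with rfl | het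
        · simpa using hx
        · exact ih (by simpa [hx] using h) e het

theorem pvBestFold_some (pass : Int × Int → Bool) :
    ∀ (l : List (Int × Int)) (acc : Option (Int × Int)) (m : Int × Int),
    l.foldl (fun best e =>
        if pass e then
          match best with
          | none => some e
          | some b => if e.1 < b.1 then some e else some b
        else best) acc = some m →
    ((m ∈ l ∧ pass m = true) ∨ acc = some m) ∧
    (∀ e ∈ l, pass e = true → m.1 ≤ e.1) ∧
    (∀ b, acc = some b → m.1 ≤ b.1) := by
  intro l
  induction l with
  | nil =>
      intro acc m h
      simp only [List.foldl_nil] at h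
      refine ⟨Or.inr h, fun e he => absurd he (List.not_mem_nil), fun b hb => ?_⟩
      rw [h] at hb; cases hb; exact le_refl _
  | cons x t ih =>
      intro acc m h
      simp only [List.foldl_cons] at h
      by_cases hx : pass x = true
      · rw [if_pos hx] at h
        cases acc with
        | none =>
            obtain ⟨hmem, hle, hacc⟩ := ih (some x) m h
            have hxle : m.1 ≤ x.1 := hacc x rfl
            refine ⟨?_, ?_, ?_⟩
            · rcases hmem with ⟨h1, h2⟩ | h1
              · exact Or.inl ⟨by simp [h1], h2⟩
              · cases h1; exact Or.inl ⟨by simp, hx⟩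
            · intro e he hpe
              rcases List.mem_cons.1 he with rfl | het
              · exact hxle
              · exact hle e het hpe
            · intro b hb; cases hb
        | some b0 =>
            have hred : (match some b0 with
                | none => some x
                | some b => if x.1 < b.1 then some x else some b)
                = if x.1 < b0.1 then some x else some b0 := rfl
            rw [hred] at h
            by_cases hcmp : x.1 < b0.1
            · rw [if_pos hcmp] at h
              obtain ⟨hmem, hle, hacc⟩ := ih (some x) m h
              have hxle : m.1 ≤ x.1 := hacc x rfl
              refine ⟨?_, ?_, ?_⟩
              · rcases hmem with ⟨h1, h2⟩ | h1
                · exact Or.inl ⟨by simp [h1], h2⟩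
                · cases h1; exact Or.inl ⟨by simp, hx⟩
              · intro e he hpe
                rcases List.mem_cons.1 he with rfl | het
                · exact hxle
                · exact hle e het hpe
              · intro b hb
                cases hb
                omega
            · rw [if_neg hcmp] at h
              obtain ⟨hmem, hle, hacc⟩ := ih (some b0) m h
              have hble : m.1 ≤ b0.1 := hacc b0 rfl
              refine ⟨?_, ?_, ?_⟩
              · rcases hmem with ⟨h1, h2⟩ | h1
                · exact Or.inl ⟨by simp [h1], h2⟩
                · cases h1; exact Or.inr rfl
              · intro e he hpe
                rcases List.mem_cons.1 he with rfl | het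
                · omega
                · exact hle e het hpe
              · intro b hb
                cases hb
                exact hble
      · rw [if_neg hx] at h
        obtain ⟨hmem, hle, hacc⟩ := ih acc m h
        refine ⟨?_, ?_, hacc⟩
        · rcases hmem with ⟨h1, h2⟩ | h1
          · exact Or.inl ⟨by simp [h1], h2⟩
          · exact Or.inr h1
        · intro e he hpe
          rcases List.mem_cons.1 he with rfl | het
          · rw [hpe] at hx; cases hx rfl
          · exact hle e het hpe

-- ---- extraction spec: extract() returns Python's min over the alive dict ----

theorem pvExtractB_succ (alive : PySem.Set Int) (deg idx : PySem.Dict Int Int) (fuel : Nat)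
    (buckets : PySem.Dict Int (List (Int × Int))) (p : Int) :
    pvExtractB alive deg idx (fuel+1) buckets p =
      (match (buckets.getD p []).foldl (fun best e =>
        if PySem.Set.contains alive e.2 && (deg.getD e.2 0 == p) && (idx.getD e.2 0 == e.1) then
          match best with
          | none => some e
          | some b => if e.1 < b.1 then some e else some b
        else best) none with
      | some b => some (b.2, p, buckets.insert p ((buckets.getD p []).filter
          (fun e => PySem.Set.contains alive e.2 && (deg.getD e.2 0 == p) && e.2 != b.2)))
      | none => pvExtractB alive deg idx fuel (buckets.erase p) (p+1)) := rfl

theorem pvExtract_spec (H : PySem.Dict Int (PySem.Dict Int Int)) (deg idx : PySem.Dict Int Int)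
    (v0 : Int) (hv0 : v0 ∈ H.keys)
    (hnd : H.keys.Nodup)
    (hpw : H.keys.Pairwise (fun a b => idx.getD a 0 < idx.getD b 0)) :
    ∀ (fuel : Nat) (buckets : PySem.Dict Int (List (Int × Int))) (p : Int),
    (∀ u ∈ H.keys, (idx.getD u 0, u) ∈ buckets.getD (deg.getD u 0) []) →
    (∀ u ∈ H.keys, p ≤ deg.getD u 0) →
    (deg.getD v0 0 < p + fuel) →
    ∃ v buckets', pvExtractB H.keys deg idx fuel buckets p = some (v, deg.getD v 0, buckets') ∧
      PySem.List.min? H.keys (fun u => deg.getD u 0) = some v ∧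
      v ∈ H.keys ∧
      (∀ u ∈ H.keys, deg.getD v 0 ≤ deg.getD u 0) ∧
      (∀ u ∈ H.keys, u ≠ v → (idx.getD u 0, u) ∈ buckets'.getD (deg.getD u 0) []) := by
  intro fuel
  induction fuel with
  | zero =>
      intro buckets p hcomp hp hfuel
      exfalso
      have := hp v0 hv0
      omega
  | succ fuel ih =>
      intro buckets p hcomp hp hfuel
      rw [pvExtractB_succ]
      rcases hbest : (buckets.getD p []).foldl (fun best e =>
          if PySem.Set.contains H.keys e.2 && (deg.getD e.2 0 == p) && (idx.getD e.2 0 == e.1) then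
            match best with
            | none => some e
            | some b => if e.1 < b.1 then some e else some b
          else best) none with _ | b
      · -- no valid entry at level p
        have hnol : ∀ u ∈ H.keys, deg.getD u 0 ≠ p := by
          intro u hu hd
          have hue : (idx.getD u 0, u) ∈ buckets.getD p [] := by
            rw [← hd]; exact hcomp u hu
          have := pvBestFold_none
            (fun e => PySem.Set.contains H.keys e.2 && (deg.getD e.2 0 == p) && (idx.getD e.2 0 == e.1))
            (buckets.getD p []) hbest (idx.getD u 0, u) hue
          simp [PySem.Set.contains_iff, hu, hd] at this
        have hcomp' : ∀ u ∈ H.keys, (idx.getD u 0, u) ∈ (buckets.erase p).getD (deg.getD u 0) [] := by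
          intro u hu
          rw [pvDict_getD_erase_of_ne _ _ (hnol u hu)]
          exact hcomp u hu
        have hp' : ∀ u ∈ H.keys, p + 1 ≤ deg.getD u 0 := by
          intro u hu
          have h1 := hp u hu
          have h2 := hnol u hu
          omega
        rw [hbest]
        exact ih (buckets.erase p) (p+1) hcomp' hp' (by omega)
      · -- a best valid entry b was found
        obtain ⟨hmem, hle, _⟩ := pvBestFold_some
          (fun e => PySem.Set.contains H.keys e.2 && (deg.getD e.2 0 == p) && (idx.getD e.2 0 == e.1))
          (buckets.getD p []) none b hbest
        rw [hbest]
        rcases hmem with ⟨hbin, hbpass⟩ | hacc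
        swap
        · cases hacc
        simp only [Bool.and_eq_true, beq_iff_eq, PySem.Set.contains_iff] at hbpass
        obtain ⟨⟨hbk, hbd⟩, hbi⟩ := hbpass
        refine ⟨b.2, buckets.insert p ((buckets.getD p []).filter
            (fun e => PySem.Set.contains H.keys e.2 && (deg.getD e.2 0 == p) && e.2 != b.2)), ?_, ?_, hbk, ?_, ?_⟩
        · rw [hbd]
        · -- Python's min picks the same vertex
          apply pvMin?_first (fun u => deg.getD u 0) (fun u => idx.getD u 0) H.keys b.2 hpw hbk
          · intro x hx
            rw [hbd]
            exact hp x hx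
          · intro x hx hdx
            rw [hbd] at hdx
            have hxe : (idx.getD x 0, x) ∈ buckets.getD p [] := by
              rw [← hdx]; exact hcomp x hx
            have := hle (idx.getD x 0, x) hxe (by simp [PySem.Set.contains_iff, hx, hdx])
            rw [hbi]
            simpa using this
        · intro u hu
          rw [hbd]
          exact hp u hu
        · intro u hu huv
          by_cases hdu : deg.getD u 0 = p
          · have hue : (idx.getD u 0, u) ∈ buckets.getD p [] := by
              rw [← hdu]; exact hcomp u hu
            have hpassf : (PySem.Set.contains H.keys u && (deg.getD u 0 == p) && (u != b.2)) = true := by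
              simp [PySem.Set.contains_iff, hu, hdu, huv]
            rw [hdu, PySem.Dict.getD_insert, if_pos rfl]
            exact List.mem_filter.2 ⟨hue, hpassf⟩
          · rw [PySem.Dict.getD_insert, if_neg hdu]
            exact hcomp u hu

-- ---- misc small lemmas ----

theorem pvDiscard_eq_erase (l : List Int) (v : Int) (h : l.Nodup) :
    PySem.Set.discard l v = l.erase v := by
  rw [List.Nodup.erase_eq_filter h]
  rfl

theorem pvDeg_lt (H : PySem.Dict Int (PySem.Dict Int Int)) (deg : PySem.Dict Int Int)
    (hI : pvInv H deg) (u : Int) (hu : u ∈ H.keys) :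
    deg.getD u 0 < (H.keys.length : Int) := by
  obtain ⟨hnd, hsz, _, hcl, hrnd, hnl⟩ := hI
  rw [hsz u hu]
  have hsub : (pvRowA H u).keys ⊆ H.keys.erase u := by
    intro b hb
    have hbc : (pvRowA H u).contains b = true := (PySem.Dict.contains_iff_mem_keys _ _).2 hb
    have hbk : b ∈ H.keys := hcl u b hbc
    have hbu : b ≠ u := by
      intro he
      rw [he] at hbc
      rw [hnl u] at hbc
      cases hbc
    exact (List.Nodup.mem_erase_iff hnd).2 ⟨hbu, hbk⟩
  have hle : (pvRowA H u).keys.length ≤ (H.keys.erase u).length :=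
    (List.subperm_of_subset (hrnd u) hsub).length_le
  have herase : (H.keys.erase u).length = H.keys.length - 1 := List.length_erase_of_mem hu
  have hpos : 0 < H.keys.length := List.length_pos_of_mem hu
  have hsize : (pvRowA H u).size = (pvRowA H u).keys.length := by
    simp [PySem.Dict.size, PySem.Dict.keys]
  rw [hsize]
  omega

-- ---- fill phase ----

-- proof-side reformulation of a single shortcut update carrying only (adj, deg)
def pvShortcutB (v : Int) (s : PySem.Dict Int (PySem.Dict Int Int) × PySem.Dict Int Int)
    (u w : Int) : PySem.Dict Int (PySem.Dict Int Int) × PySem.Dict Int Int :=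
  let adj := s.1
  let deg := s.2
  let nw := (pvRowA adj v).getD u 0 + (pvRowA adj v).getD w 0
  if (pvRowA adj u).contains w = false ∨ nw < (pvRowA adj u).getD w 0 then
    let deg := if (pvRowA adj u).contains w = false then deg.insert u (deg.getD u 0 + 1) else deg
    let deg := if (pvRowA adj w).contains u = false then deg.insert w (deg.getD w 0 + 1) else deg
    let adj' := adj.insert u ((pvRowA adj u).insert w nw)
    (adj'.insert w ((pvRowA adj' w).insert u nw), deg)
  else s

theorem pvShortcut_inv (v : Int) (H : PySem.Dict Int (PySem.Dict Int Int))
    (deg : PySem.Dict Int Int) (u w : Int)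
    (hI : pvInv H deg) (hu : u ∈ H.keys) (hw : w ∈ H.keys) (huw : u ≠ w)
    (huv : u ≠ v) (hwv : w ≠ v) :
    pvInv (pvShortcutB v (H, deg) u w).1 (pvShortcutB v (H, deg) u w).2 ∧
    (pvShortcutB v (H, deg) u w).1.keys = H.keys ∧
    pvRowA (pvShortcutB v (H, deg) u w).1 v = pvRowA H v := by
  obtain ⟨hnd, hsz, hsym, hcl, hrnd, hnl⟩ := hI
  unfold pvShortcutB
  dsimp only
  by_cases hcond : (pvRowA H u).contains w = false ∨
      (pvRowA H v).getD u 0 + (pvRowA H v).getD w 0 < (pvRowA H u).getD w 0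
  case neg =>
    rw [if_neg hcond]
    exact ⟨⟨hnd, hsz, hsym, hcl, hrnd, hnl⟩, rfl, rfl⟩
  case pos =>
    rw [if_pos hcond]
    set nw := (pvRowA H v).getD u 0 + (pvRowA H v).getD w 0 with hnw
    have hwu : w ≠ u := Ne.symm huw
    have hrmid : pvRowA (H.insert u ((pvRowA H u).insert w nw)) w = pvRowA H w := by
      rw [pvRow_insert]; rw [if_neg hwu]
    have hrow2 : ∀ a : Int,
        pvRowA ((H.insert u ((pvRowA H u).insert w nw)).insert w
          ((pvRowA (H.insert u ((pvRowA H u).insert w nw)) w).insert u nw)) a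
        = if a = w then (pvRowA H w).insert u nw
          else if a = u then (pvRowA H u).insert w nw
          else pvRowA H a := by
      intro a
      rw [pvRow_insert, pvRow_insert, if_neg hwu, pvRow_insert]
    have hkeys : ((H.insert u ((pvRowA H u).insert w nw)).insert w
        ((pvRowA (H.insert u ((pvRowA H u).insert w nw)) w).insert u nw)).keys = H.keys := by
      rw [PySem.Dict.keys_insert_of_contains, PySem.Dict.keys_insert_of_contains]
      · exact (PySem.Dict.contains_iff_mem_keys H u).2 hu
      · rw [PySem.Dict.contains_insert]
        have : H.contains w = true := (PySem.Dict.contains_iff_mem_keys H w).2 hw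
        simp [this]
    refine ⟨⟨?_, ?_, ?_, ?_, ?_, ?_⟩, hkeys, ?_⟩
    · rw [hkeys]; exact hnd
    · -- degree/size invariant
      intro x hx
      rw [hkeys] at hx
      rw [hrow2 x]
      have hszw := hsz w hw
      have hszu := hsz u hu
      have hszx := hsz x hx
      clear hsym hcl hrnd hnl hnd hcond hsz hrow2 hkeys hrmid
      by_cases c1 : (pvRowA H u).contains w = false <;>
        by_cases c2 : (pvRowA H w).contains u = false <;>
        by_cases hxw : x = w <;> by_cases hxu : x = u <;>
        simp_all [PySem.Dict.getD_insert, PySem.Dict.size_insert] <;>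
        omega
    · -- symmetry
      intro a b
      rw [hrow2 a, hrow2 b]
      have h0 := hsym a b
      have h1 := hsym a w
      have h2 := hsym a u
      have h3 := hsym w b
      have h4 := hsym u b
      have h5 := hnl w
      have h6 := hnl u
      clear hsym hsz hcl hrnd hcond hnd hrow2 hkeys hrmid hnl
      by_cases e1 : a = w <;> by_cases e2 : a = u <;> by_cases e3 : b = w <;> by_cases e4 : b = u <;>
        simp_all [PySem.Dict.contains_insert]
    · -- closedness
      intro a b hab
      rw [hkeys]
      rw [hrow2 a] at hab
      by_cases e1 : a = w
      · rw [if_pos e1, PySem.Dict.contains_insert] at hab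
        simp only [Bool.or_eq_true, beq_iff_eq] at hab
        rcases hab with h | h
        · subst h; exact hu
        · exact hcl w b h
      · rw [if_neg e1] at hab
        by_cases e2 : a = u
        · rw [if_pos e2, PySem.Dict.contains_insert] at hab
          simp only [Bool.or_eq_true, beq_iff_eq] at hab
          rcases hab with h | h
          · subst h; exact hw
          · exact hcl u b h
        · rw [if_neg e2] at hab
          exact hcl a b hab
    · -- rows nodup
      intro a
      rw [hrow2 a]
      by_cases e1 : a = w
      · rw [if_pos e1]; exact PySem.Dict.nodup_keys_insert _ _ _ (hrnd w)
      · rw [if_neg e1]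
        by_cases e2 : a = u
        · rw [if_pos e2]; exact PySem.Dict.nodup_keys_insert _ _ _ (hrnd u)
        · rw [if_neg e2]; exact hrnd a
    · -- no self loops
      intro a
      rw [hrow2 a]
      have h5 := hnl w
      have h6 := hnl u
      have h7 := hnl a
      clear hsym hsz hcl hrnd hcond hnd hrow2 hkeys hrmid hnl
      by_cases e1 : a = w <;> by_cases e2 : a = u <;>
        simp_all [PySem.Dict.contains_insert]
    · rw [hrow2 v, if_neg (Ne.symm hwv), if_neg (Ne.symm huv)]

theorem pvFillB_fst (idx : PySem.Dict Int Int) (v : Int)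
    (s : PySem.Dict Int (PySem.Dict Int Int) × PySem.Dict Int Int × PySem.Dict Int (List (Int × Int)))
    (u w : Int) : (pvFillB idx v s u w).1 = pvStepPairA v s.1 u w := by
  rcases s with ⟨adj, deg, bk⟩
  unfold pvFillB pvStepPairA
  rw [pvRowB_eq]
  dsimp only
  split_ifs <;> rfl

theorem pvFillB_shortcut (idx : PySem.Dict Int Int) (v : Int)
    (adj : PySem.Dict Int (PySem.Dict Int Int)) (deg : PySem.Dict Int Int)
    (bk : PySem.Dict Int (List (Int × Int))) (u w : Int)
    (hsym : (pvRowA adj w).contains u = (pvRowA adj u).contains w) :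
    ((pvFillB idx v (adj, deg, bk) u w).1, (pvFillB idx v (adj, deg, bk) u w).2.1)
      = pvShortcutB v (adj, deg) u w := by
  unfold pvFillB pvShortcutB
  rw [pvRowB_eq]
  dsimp only
  by_cases hcond : (pvRowA adj u).contains w = false ∨
      (pvRowA adj v).getD u 0 + (pvRowA adj v).getD w 0 < (pvRowA adj u).getD w 0
  · rw [if_pos hcond, if_pos hcond]
    by_cases c1 : (pvRowA adj u).contains w = false
    · rw [if_pos c1, if_pos c1, if_pos (by rw [hsym]; exact c1)]
    · rw [if_neg c1, if_neg c1, if_neg (by rw [hsym]; exact c1)]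
  · rw [if_neg hcond, if_neg hcond]

theorem pvFill_inv (idx : PySem.Dict Int Int) (v : Int)
    (adj : PySem.Dict Int (PySem.Dict Int Int)) (deg : PySem.Dict Int Int)
    (bk : PySem.Dict Int (List (Int × Int))) (u w : Int) (p : Int)
    (hI : pvInv adj deg) (hu : u ∈ adj.keys) (hw : w ∈ adj.keys) (huw : u ≠ w)
    (huv : u ≠ v) (hwv : w ≠ v)
    (hcomp : ∀ a ∈ adj.keys, a ≠ v → (idx.getD a 0, a) ∈ bk.getD (deg.getD a 0) [])
    (hp : ∀ a ∈ adj.keys, a ≠ v → p ≤ deg.getD a 0) :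
    pvInv (pvFillB idx v (adj, deg, bk) u w).1 (pvFillB idx v (adj, deg, bk) u w).2.1 ∧
    (pvFillB idx v (adj, deg, bk) u w).1.keys = adj.keys ∧
    pvRowA (pvFillB idx v (adj, deg, bk) u w).1 v = pvRowA adj v ∧
    (∀ a ∈ adj.keys, a ≠ v → (idx.getD a 0, a) ∈
      (pvFillB idx v (adj, deg, bk) u w).2.2.getD ((pvFillB idx v (adj, deg, bk) u w).2.1.getD a 0) []) ∧
    (∀ a ∈ adj.keys, a ≠ v → p ≤ (pvFillB idx v (adj, deg, bk) u w).2.1.getD a 0) := by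
  have hsymH := hI.2.2.1
  have hpair := pvFillB_shortcut idx v adj deg bk u w (hsymH w u)
  have h1 : (pvFillB idx v (adj, deg, bk) u w).1 = (pvShortcutB v (adj, deg) u w).1 :=
    congrArg Prod.fst hpair
  have h2 : (pvFillB idx v (adj, deg, bk) u w).2.1 = (pvShortcutB v (adj, deg) u w).2 :=
    congrArg Prod.snd hpair
  obtain ⟨hIs, hks, hrs⟩ := pvShortcut_inv v adj deg u w hI hu hw huw huv hwv
  have hdegbk : ((pvFillB idx v (adj, deg, bk) u w).2.1, (pvFillB idx v (adj, deg, bk) u w).2.2)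
      = if (pvRowA adj u).contains w = false then
          ((deg.insert u (deg.getD u 0 + 1)).insert w
            ((deg.insert u (deg.getD u 0 + 1)).getD w 0 + 1),
           pvBApp (pvBApp bk ((deg.insert u (deg.getD u 0 + 1)).getD u 0) (idx.getD u 0, u))
             (((deg.insert u (deg.getD u 0 + 1)).insert w
                ((deg.insert u (deg.getD u 0 + 1)).getD w 0 + 1)).getD w 0) (idx.getD w 0, w))
        else (deg, bk) := by
    unfold pvFillB
    rw [pvRowB_eq]
    dsimp only
    by_cases c1 : (pvRowA adj u).contains w = false
    · rw [if_pos (Or.inl c1), if_pos c1, if_pos c1]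
    · rw [if_neg c1]
      by_cases hcond : (pvRowA adj u).contains w = false ∨
          (pvRowA adj v).getD u 0 + (pvRowA adj v).getD w 0 < (pvRowA adj u).getD w 0
      · rw [if_pos hcond, if_neg c1]
      · rw [if_neg hcond, if_neg c1]
  have hd : (pvFillB idx v (adj, deg, bk) u w).2.1
      = if (pvRowA adj u).contains w = false then
          (deg.insert u (deg.getD u 0 + 1)).insert w
            ((deg.insert u (deg.getD u 0 + 1)).getD w 0 + 1)
        else deg := by
    have := congrArg Prod.fst hdegbk
    simpa [apply_ite Prod.fst] using this
  have hb : (pvFillB idx v (adj, deg, bk) u w).2.2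
      = if (pvRowA adj u).contains w = false then
          pvBApp (pvBApp bk ((deg.insert u (deg.getD u 0 + 1)).getD u 0) (idx.getD u 0, u))
             (((deg.insert u (deg.getD u 0 + 1)).insert w
                ((deg.insert u (deg.getD u 0 + 1)).getD w 0 + 1)).getD w 0) (idx.getD w 0, w)
        else bk := by
    have := congrArg Prod.snd hdegbk
    simpa [apply_ite Prod.snd] using this
  have hwu : w ≠ u := Ne.symm huw
  refine ⟨by rw [h1, h2]; exact hIs, by rw [h1]; exact hks, by rw [h1]; exact hrs, ?_, ?_⟩
  · intro a ha hav
    rw [hd, hb]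
    by_cases c1 : (pvRowA adj u).contains w = false
    · rw [if_pos c1, if_pos c1]
      have e1 : (deg.insert u (deg.getD u 0 + 1)).getD u 0 = deg.getD u 0 + 1 := by
        rw [PySem.Dict.getD_insert, if_pos rfl]
      have e2 : (deg.insert u (deg.getD u 0 + 1)).getD w 0 = deg.getD w 0 := by
        rw [PySem.Dict.getD_insert, if_neg hwu]
      have e3 : ((deg.insert u (deg.getD u 0 + 1)).insert w
          ((deg.insert u (deg.getD u 0 + 1)).getD w 0 + 1)).getD w 0 = deg.getD w 0 + 1 := by
        rw [PySem.Dict.getD_insert, if_pos rfl, e2]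
      have e4 : ((deg.insert u (deg.getD u 0 + 1)).insert w
          ((deg.insert u (deg.getD u 0 + 1)).getD w 0 + 1)).getD u 0 = deg.getD u 0 + 1 := by
        rw [PySem.Dict.getD_insert, if_neg huw, e1]
      by_cases hau : a = u
      · subst hau
        rw [e1, e3, e4]
        exact pvBApp_mono _ _ _ _ _ (pvBApp_self _ _ _)
      · by_cases haw : a = w
        · subst haw
          rw [e1, e3]
          exact pvBApp_self _ _ _
        · have e5 : ((deg.insert u (deg.getD u 0 + 1)).insert w
              ((deg.insert u (deg.getD u 0 + 1)).getD w 0 + 1)).getD a 0 = deg.getD a 0 := by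
            rw [PySem.Dict.getD_insert, if_neg haw, PySem.Dict.getD_insert, if_neg hau]
          rw [e5]
          exact pvBApp_mono _ _ _ _ _ (pvBApp_mono _ _ _ _ _ (hcomp a ha hav))
    · rw [if_neg c1, if_neg c1]
      exact hcomp a ha hav
  · intro a ha hav
    rw [hd]
    by_cases c1 : (pvRowA adj u).contains w = false
    · rw [if_pos c1]
      have hpa := hp a ha hav
      have e2 : (deg.insert u (deg.getD u 0 + 1)).getD w 0 = deg.getD w 0 := by
        rw [PySem.Dict.getD_insert, if_neg hwu]
      by_cases haw : a = w
      · subst haw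
        rw [PySem.Dict.getD_insert, if_pos rfl, e2]
        omega
      · by_cases hau : a = u
        · subst hau
          rw [PySem.Dict.getD_insert, if_neg huw, PySem.Dict.getD_insert, if_pos rfl]
          omega
        · rw [PySem.Dict.getD_insert, if_neg haw, PySem.Dict.getD_insert, if_neg hau]
          exact hpa
    · rw [if_neg c1]
      exact hp a ha hav

theorem pvPairsFill_inv (idx : PySem.Dict Int Int) (v : Int) (p : Int) :
    ∀ (ps : List (Int × Int)) (adj : PySem.Dict Int (PySem.Dict Int Int))
      (deg : PySem.Dict Int Int) (bk : PySem.Dict Int (List (Int × Int))),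
    pvInv adj deg →
    (∀ q ∈ ps, q.1 ∈ adj.keys ∧ q.2 ∈ adj.keys ∧ q.1 ≠ q.2 ∧ q.1 ≠ v ∧ q.2 ≠ v) →
    (∀ a ∈ adj.keys, a ≠ v → (idx.getD a 0, a) ∈ bk.getD (deg.getD a 0) []) →
    (∀ a ∈ adj.keys, a ≠ v → p ≤ deg.getD a 0) →
    pvInv (ps.foldl (fun s q => pvFillB idx v s q.1 q.2) (adj, deg, bk)).1
        (ps.foldl (fun s q => pvFillB idx v s q.1 q.2) (adj, deg, bk)).2.1 ∧
    (ps.foldl (fun s q => pvFillB idx v s q.1 q.2) (adj, deg, bk)).1.keys = adj.keys ∧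
    pvRowA (ps.foldl (fun s q => pvFillB idx v s q.1 q.2) (adj, deg, bk)).1 v = pvRowA adj v ∧
    (∀ a ∈ adj.keys, a ≠ v → (idx.getD a 0, a) ∈
      (ps.foldl (fun s q => pvFillB idx v s q.1 q.2) (adj, deg, bk)).2.2.getD
        ((ps.foldl (fun s q => pvFillB idx v s q.1 q.2) (adj, deg, bk)).2.1.getD a 0) []) ∧
    (∀ a ∈ adj.keys, a ≠ v → p ≤ (ps.foldl (fun s q => pvFillB idx v s q.1 q.2) (adj, deg, bk)).2.1.getD a 0) := by
  intro ps
  induction ps with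
  | nil =>
      intro adj deg bk hI _ hcomp hp
      exact ⟨hI, rfl, rfl, hcomp, hp⟩
  | cons q t ih =>
      intro adj deg bk hI hmem hcomp hp
      obtain ⟨hq1, hq2, hqne, hqv1, hqv2⟩ := hmem q (by simp)
      obtain ⟨hI', hk', hr', hcomp', hp'⟩ :=
        pvFill_inv idx v adj deg bk q.1 q.2 p hI hq1 hq2 hqne hqv1 hqv2 hcomp hp
      simp only [List.foldl_cons]
      have heta : pvFillB idx v (adj, deg, bk) q.1 q.2
          = ((pvFillB idx v (adj, deg, bk) q.1 q.2).1,
             (pvFillB idx v (adj, deg, bk) q.1 q.2).2.1,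
             (pvFillB idx v (adj, deg, bk) q.1 q.2).2.2) := rfl
      rw [heta]
      obtain ⟨B1, B2, B3, B4, B5⟩ := ih _ _ _ hI'
        (fun r hr => by
          obtain ⟨r1, r2, rne, rv1, rv2⟩ := hmem r (by simp [hr])
          exact ⟨by rw [hk']; exact r1, by rw [hk']; exact r2, rne, rv1, rv2⟩)
        (fun a ha hav => hcomp' a (by rwa [hk'] at ha) hav)
        (fun a ha hav => hp' a (by rwa [hk'] at ha) hav)
      refine ⟨B1, by rw [B2, hk'], by rw [B3, hr'], ?_, ?_⟩
      · intro a ha hav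
        exact B4 a (by rw [hk']; exact ha) hav
      · intro a ha hav
        exact B5 a (by rw [hk']; exact ha) hav

-- ---- deletion phase ----

def pvDelStepB (idx : PySem.Dict Int Int) (v : Int)
    (s4 : PySem.Dict Int (PySem.Dict Int Int) × PySem.Dict Int Int ×
          PySem.Dict Int (List (Int × Int)) × Int) (u : Int) :
    PySem.Dict Int (PySem.Dict Int Int) × PySem.Dict Int Int ×
      PySem.Dict Int (List (Int × Int)) × Int :=
  let adj' := s4.1.insert u ((pvRowB s4.1 u).erase v)
  let deg' := s4.2.1.insert u (s4.2.1.getD u 0 - 1)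
  let bk' := pvBApp s4.2.2.1 (deg'.getD u 0) (idx.getD u 0, u)
  let p' := if deg'.getD u 0 < s4.2.2.2 then deg'.getD u 0 else s4.2.2.2
  (adj', deg', bk', p')

theorem pvDelFoldAB (idx : PySem.Dict Int Int) (v : Int) :
    ∀ (nbrs : List Int) (adj : PySem.Dict Int (PySem.Dict Int Int)) (deg : PySem.Dict Int Int)
      (bk : PySem.Dict Int (List (Int × Int))) (p : Int),
    nbrs.Nodup →
    (∀ u ∈ nbrs, (pvRowA adj u).contains v = true) →
    (∀ u ∈ nbrs, u ∈ adj.keys) →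
    (nbrs.foldl (pvDelStepB idx v) (adj, deg, bk, p)).1 = nbrs.foldl (pvDelStepA v) adj ∧
    (∀ a : Int, (nbrs.foldl (pvDelStepB idx v) (adj, deg, bk, p)).2.1.getD a 0
      = if a ∈ nbrs then deg.getD a 0 - 1 else deg.getD a 0) ∧
    (∀ (e : Int × Int) (d : Int), e ∈ bk.getD d [] →
      e ∈ (nbrs.foldl (pvDelStepB idx v) (adj, deg, bk, p)).2.2.1.getD d []) ∧
    (∀ u ∈ nbrs, (idx.getD u 0, u) ∈
      (nbrs.foldl (pvDelStepB idx v) (adj, deg, bk, p)).2.2.1.getD (deg.getD u 0 - 1) []) ∧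
    (nbrs.foldl (pvDelStepB idx v) (adj, deg, bk, p)).2.2.2 ≤ p ∧
    (∀ u ∈ nbrs, (nbrs.foldl (pvDelStepB idx v) (adj, deg, bk, p)).2.2.2 ≤ deg.getD u 0 - 1) ∧
    (0 ≤ p → (∀ u ∈ nbrs, 1 ≤ deg.getD u 0) →
      0 ≤ (nbrs.foldl (pvDelStepB idx v) (adj, deg, bk, p)).2.2.2) := by
  intro nbrs
  induction nbrs with
  | nil =>
      intro adj deg bk p _ _ _
      exact ⟨rfl, fun a => by simp, fun e d he => he,
        fun u hu => absurd hu List.not_mem_nil, le_refl _,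
        fun u hu => absurd hu List.not_mem_nil, fun h _ => h⟩
  | cons u0 t ih =>
      intro adj deg bk p hnd hcv hkeys
      obtain ⟨hu0t, hndt⟩ := List.nodup_cons.1 hnd
      have hc0 : (pvRowA adj u0).contains v = true := hcv u0 (by simp)
      have hk0 : u0 ∈ adj.keys := hkeys u0 (by simp)
      simp only [List.foldl_cons]
      have hstep : pvDelStepB idx v (adj, deg, bk, p) u0
          = (adj.insert u0 ((pvRowA adj u0).erase v),
             deg.insert u0 (deg.getD u0 0 - 1),
             pvBApp bk ((deg.insert u0 (deg.getD u0 0 - 1)).getD u0 0) (idx.getD u0 0, u0),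
             if (deg.insert u0 (deg.getD u0 0 - 1)).getD u0 0 < p
               then (deg.insert u0 (deg.getD u0 0 - 1)).getD u0 0 else p) := rfl
      rw [hstep]
      have hstepA : pvDelStepA v adj u0 = adj.insert u0 ((pvRowA adj u0).erase v) := by
        unfold pvDelStepA; rw [if_pos hc0]
      rw [hstepA]
      have hdeg1u0 : (deg.insert u0 (deg.getD u0 0 - 1)).getD u0 0 = deg.getD u0 0 - 1 := by
        rw [PySem.Dict.getD_insert, if_pos rfl]
      rw [hdeg1u0]
      have hrows1 : ∀ a : Int, a ≠ u0 →
          pvRowA (adj.insert u0 ((pvRowA adj u0).erase v)) a = pvRowA adj a := by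
        intro a ha
        rw [pvRow_insert, if_neg ha]
      have hkeys1 : (adj.insert u0 ((pvRowA adj u0).erase v)).keys = adj.keys :=
        PySem.Dict.keys_insert_of_contains _ _ ((PySem.Dict.contains_iff_mem_keys _ _).2 hk0)
      obtain ⟨A1, A2, A3, A4, A5, A6, A7⟩ := ih (adj.insert u0 ((pvRowA adj u0).erase v))
        (deg.insert u0 (deg.getD u0 0 - 1))
        (pvBApp bk (deg.getD u0 0 - 1) (idx.getD u0 0, u0))
        (if deg.getD u0 0 - 1 < p then deg.getD u0 0 - 1 else p) hndt
        (fun u hu => by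
          rw [hrows1 u (fun he => hu0t (he ▸ hu))]
          exact hcv u (by simp [hu]))
        (fun u hu => by rw [hkeys1]; exact hkeys u (by simp [hu]))
      have hmin_le : (if deg.getD u0 0 - 1 < p then deg.getD u0 0 - 1 else p) ≤ p := by
        split_ifs with h <;> omega
      have hmin_le2 : (if deg.getD u0 0 - 1 < p then deg.getD u0 0 - 1 else p)
          ≤ deg.getD u0 0 - 1 := by
        split_ifs with h <;> omega
      refine ⟨A1, ?_, ?_, ?_, ?_, ?_, ?_⟩
      · intro a
        rw [A2 a]
        by_cases hat : a ∈ t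
        · have hau : a ≠ u0 := fun he => hu0t (he ▸ hat)
          rw [PySem.Dict.getD_insert, if_neg hau]
          simp [hat, List.mem_cons]
        · by_cases hau : a = u0
          · subst hau
            rw [if_neg hat, hdeg1u0]
            simp
          · rw [if_neg hat, PySem.Dict.getD_insert, if_neg hau]
            have : a ∉ u0 :: t := by simp [hau, hat]
            rw [if_neg this]
      · intro e d he
        exact A3 e d (pvBApp_mono _ _ _ _ _ he)
      · intro u hu
        rcases List.mem_cons.1 hu with rfl | hut
        · have hself : (idx.getD u 0, u) ∈
              (pvBApp bk (deg.getD u 0 - 1) (idx.getD u 0, u)).getD (deg.getD u 0 - 1) [] :=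
            pvBApp_self _ _ _
          exact A3 _ _ hself
        · have hne : u ≠ u0 := fun he => hu0t (he ▸ hut)
          have := A4 u hut
          rwa [PySem.Dict.getD_insert, if_neg hne] at this
      · exact le_trans A5 hmin_le
      · intro u hu
        rcases List.mem_cons.1 hu with rfl | hut
        · exact le_trans A5 hmin_le2
        · have hne : u ≠ u0 := fun he => hu0t (he ▸ hut)
          have := A6 u hut
          rwa [PySem.Dict.getD_insert, if_neg hne] at this
      · intro hp0 hdeg1
        have hd0 : 1 ≤ deg.getD u0 0 := hdeg1 u0 (by simp)
        apply A7
        · split_ifs with h <;> omega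
        · intro u hu
          have hne : u ≠ u0 := fun he => hu0t (he ▸ hu)
          rw [PySem.Dict.getD_insert, if_neg hne]
          exact hdeg1 u (by simp [hu])

theorem pvDelFoldA_char (v : Int) :
    ∀ (nb : List Int) (H : PySem.Dict Int (PySem.Dict Int Int)),
    nb.Nodup →
    ((nb.foldl (pvDelStepA v) H).keys = H.keys) ∧
    (∀ a : Int, pvRowA (nb.foldl (pvDelStepA v) H) a
        = if a ∈ nb ∧ (pvRowA H a).contains v = true then (pvRowA H a).erase v else pvRowA H a) := by
  intro nb
  induction nb with
  | nil =>
      intro H _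
      exact ⟨rfl, fun a => by simp⟩
  | cons u t ih =>
      intro H hnd
      obtain ⟨hut, hndt⟩ := List.nodup_cons.1 hnd
      simp only [List.foldl_cons]
      by_cases hc : (pvRowA H u).contains v = true
      · have hu : u ∈ H.keys := pvRow_mem_of_contains H hc
        have hstep : pvDelStepA v H u = H.insert u ((pvRowA H u).erase v) := by
          unfold pvDelStepA; rw [if_pos hc]
        rw [hstep]
        obtain ⟨k, r⟩ := ih (H.insert u ((pvRowA H u).erase v)) hndt
        refine ⟨?_, fun a => ?_⟩
        · rw [k, PySem.Dict.keys_insert_of_contains _ _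
            ((PySem.Dict.contains_iff_mem_keys _ _).2 hu)]
        · rw [r a]
          simp only [pvRow_insert]
          by_cases hau : a = u
          · subst hau
            have hat : a ∉ t := hut
            simp [hat, hc]
          · simp only [if_neg hau]
            by_cases hat : a ∈ t
            · simp [hat, hau]
            · simp [hat, hau]
      · have hstep : pvDelStepA v H u = H := by
          unfold pvDelStepA; rw [if_neg hc]
        rw [hstep]
        obtain ⟨k, r⟩ := ih H hndt
        refine ⟨k, fun a => ?_⟩
        rw [r a]
        by_cases hau : a = u
        · subst hau; simp [hc]
        · simp [hau]

theorem pvElimFinal_inv' (v : Int) (H1 : PySem.Dict Int (PySem.Dict Int Int))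
    (deg1 degB : PySem.Dict Int Int) (nbrs : List Int)
    (hI : pvInv H1 deg1) (hv : v ∈ H1.keys) (hnbrs : nbrs = (pvRowA H1 v).keys)
    (hdegB : ∀ a : Int, degB.getD a 0 = if a ∈ nbrs then deg1.getD a 0 - 1 else deg1.getD a 0) :
    pvInv ((nbrs.foldl (pvDelStepA v) H1).erase v) (degB.erase v) ∧
    ((nbrs.foldl (pvDelStepA v) H1).erase v).keys = H1.keys.erase v := by
  obtain ⟨hnd, hsz, hsym, hcl, hrnd, hnl⟩ := hI
  have hnbnd : nbrs.Nodup := by rw [hnbrs]; exact hrnd v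
  obtain ⟨k, r⟩ := pvDelFoldA_char v nbrs H1 hnbnd
  have hmem_nbrs : ∀ b : Int, b ∈ nbrs ↔ (pvRowA H1 v).contains b = true := by
    intro b
    rw [hnbrs]
    exact (PySem.Dict.contains_iff_mem_keys _ _).symm
  have hmemc : ∀ x ∈ nbrs, (pvRowA H1 x).contains v = true := by
    intro x hx
    rw [hsym x v]
    exact (hmem_nbrs x).1 hx
  have r' : ∀ a : Int, pvRowA (nbrs.foldl (pvDelStepA v) H1) a
      = if a ∈ nbrs then (pvRowA H1 a).erase v else pvRowA H1 a := by
    intro a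
    rw [r a]
    by_cases hat : a ∈ nbrs
    · rw [if_pos ⟨hat, hmemc a hat⟩, if_pos hat]
    · rw [if_neg (fun h => hat h.1), if_neg hat]
  have hkeysfin : ((nbrs.foldl (pvDelStepA v) H1).erase v).keys = H1.keys.erase v := by
    rw [pvDict_keys_erase, k, List.Nodup.erase_eq_filter hnd]
    rfl
  have hrowfin : ∀ a : Int, a ≠ v →
      pvRowA ((nbrs.foldl (pvDelStepA v) H1).erase v) a
      = if a ∈ nbrs then (pvRowA H1 a).erase v else pvRowA H1 a := by
    intro a ha
    rw [pvRow_erase _ _ ha, r' a]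
  have hrowfinv : pvRowA ((nbrs.foldl (pvDelStepA v) H1).erase v) v
      = PySem.Dict.empty := pvRow_erase_self _ _
  have hcont : ∀ a b : Int, a ≠ v →
      (pvRowA ((nbrs.foldl (pvDelStepA v) H1).erase v) a).contains b
      = if b = v then false else (pvRowA H1 a).contains b := by
    intro a b ha
    rw [hrowfin a ha]
    by_cases hbv : b = v
    · subst hbv
      rw [if_pos rfl]
      by_cases han : a ∈ nbrs
      · rw [if_pos han, pvDict_contains_erase]
        simp
      · rw [if_neg han]
        cases hval : (pvRowA H1 a).contains b
        · rfl
        · exfalso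
          rw [hsym a b] at hval
          exact han ((hmem_nbrs a).2 hval)
    · rw [if_neg hbv]
      by_cases han : a ∈ nbrs
      · rw [if_pos han, pvDict_contains_erase]
        have : (b == v) = false := by simpa using hbv
        simp [this]
      · rw [if_neg han]
  refine ⟨⟨?_, ?_, ?_, ?_, ?_, ?_⟩, hkeysfin⟩
  · rw [hkeysfin]; exact hnd.erase v
  · intro x hx
    rw [hkeysfin] at hx
    have hxv : x ≠ v := (List.Nodup.mem_erase_iff hnd).1 hx |>.1
    have hxk : x ∈ H1.keys := (List.Nodup.mem_erase_iff hnd).1 hx |>.2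
    rw [pvDict_getD_erase_of_ne _ _ hxv, hdegB x, hrowfin x hxv]
    by_cases hcn : x ∈ nbrs
    · rw [if_pos hcn, if_pos hcn, hsz x hxk,
        pvDict_size_erase _ _ (hrnd x) (hmemc x hcn)]
    · rw [if_neg hcn, if_neg hcn, hsz x hxk]
  · intro a b
    by_cases ha : a = v <;> by_cases hb : b = v
    · subst ha; subst hb; rfl
    · rw [ha, hrowfinv, hcont b v hb, if_pos rfl]
      simp [PySem.Dict.contains_empty]
    · rw [hb, hrowfinv, hcont a v ha, if_pos rfl]
      simp [PySem.Dict.contains_empty]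
    · rw [hcont a b ha, hcont b a hb, if_neg hb, if_neg ha]
      exact hsym a b
  · intro a b hab
    rw [hkeysfin]
    by_cases ha : a = v
    · rw [ha, hrowfinv] at hab
      simp [PySem.Dict.contains_empty] at hab
    · rw [hcont a b ha] at hab
      by_cases hb : b = v
      · rw [if_pos hb] at hab; cases hab
      · rw [if_neg hb] at hab
        exact (List.Nodup.mem_erase_iff hnd).2 ⟨hb, hcl a b hab⟩
  · intro a
    by_cases ha : a = v
    · rw [ha, hrowfinv]; simp [PySem.Dict.keys_empty]
    · rw [hrowfin a ha]
      by_cases hcn : a ∈ nbrs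
      · rw [if_pos hcn]; exact pvDict_nodup_keys_erase _ _ (hrnd a)
      · rw [if_neg hcn]; exact hrnd a
  · intro a
    by_cases ha : a = v
    · rw [ha, hrowfinv]; simp [PySem.Dict.contains_empty]
    · rw [hcont a a ha, if_neg ha]
      exact hnl a

-- ---- A-side characterisation of dp_vertex_elim ----

theorem pvElimA_char (H : PySem.Dict Int (PySem.Dict Int Int)) (v : Int)
    (hcv : H.contains v = true) :
    dp_vertex_elim H v
      = ((pvRowA H v).keys.foldl (pvDelStepA v)
          ((pvPairs (pvRowA H v).keys).foldl (fun s q => pvStepPairA v s q.1 q.2) H)).erase v := by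
  have h : dp_vertex_elim H v
      = ((pvRowA H v).keys.foldl (pvDelStepA v)
          ((PySem.List.pyRange 0 ((pvRowA H v).keys.length : Int) 1).foldl (fun s i =>
            (PySem.List.pyRange (i+1) ((pvRowA H v).keys.length : Int) 1).foldl
              (fun s j => pvStepPairA v s (PySem.List.pyGetD (pvRowA H v).keys i 0)
                (PySem.List.pyGetD (pvRowA H v).keys j 0)) s) H)).erase v := by
    unfold dp_vertex_elim
    rw [if_neg (by simp [hcv])]
    rfl
  rw [h, pvFoldA_pairs (pvStepPairA v) (pvRowA H v).keys H]

-- ---- the main loops ----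

def pvStepA (st : PySem.Dict Int (PySem.Dict Int Int) × PySem.Dict Int (List Int) ×
    PySem.Dict Int (List Int) × PySem.Dict Int Int) (i : Int) :
    PySem.Dict Int (PySem.Dict Int Int) × PySem.Dict Int (List Int) ×
      PySem.Dict Int (List Int) × PySem.Dict Int Int :=
  match PySem.List.min? st.1.keys (fun u => ((st.1.getD u PySem.Dict.empty).size : Int)) with
  | none => st
  | some v =>
    let neighbors := (pvRowA st.1 v).keys
    let bag := v :: neighbors
    let lam := neighbors.foldl (fun lam u => lam ++ [(pvRowA st.1 v).getD u 0]) [(0:Int)]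
    (dp_vertex_elim st.1 v, st.2.1.insert v bag, st.2.2.1.insert v lam, st.2.2.2.insert v i)

def pvIter {σ : Type} (f : σ → σ) : Nat → σ → σ
  | 0, s => s
  | k+1, s => pvIter f k (f s)

theorem pvFoldl_iter {α σ : Type} (f : σ → σ) (g : σ → α → σ) (hg : ∀ s a, g s a = f s) :
    ∀ (l : List α) (s : σ), l.foldl g s = pvIter f l.length s := by
  intro l
  induction l with
  | nil => intro s; rfl
  | cons x t ih =>
      intro s
      simp only [List.foldl_cons, List.length_cons, hg s x]
      exact ih (f s)

theorem pvRange_len (n : Nat) : (PySem.List.pyRange 0 (n : Int) 1).length = n := by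
  rw [PySem.List.pyRange_one]
  simp

theorem pvKeys_eq_map_fst {ν : Type} (d : PySem.Dict Int ν) {l : List (Int × ν)}
    (h : d.items = l) : d.keys = l.map (fun q => q.1) := by
  simp [PySem.Dict.keys, h]

theorem pvStepB_eq (idx : PySem.Dict Int Int) (H : PySem.Dict Int (PySem.Dict Int Int))
    (deg : PySem.Dict Int Int) (buckets : PySem.Dict Int (List (Int × Int))) (p : Int)
    (alive : PySem.Set Int) (trace : List (Int × List Int × List Int))
    (v p1 : Int) (bk1 : PySem.Dict Int (List (Int × Int)))
    (hx : pvExtractB alive deg idx (alive.length + 1) buckets p = some (v, p1, bk1)) (i : Int) :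
    pvStepB idx (H, deg, buckets, p, alive, trace) i =
      (((pvRowA H v).keys.foldl (pvDelStepB idx v)
        (((PySem.List.enumerate (pvRowA H v).keys 0).foldl (fun s3 q =>
          (PySem.List.slice (pvRowA H v).keys (some (q.1+1)) none).foldl
            (fun s3 w => pvFillB idx v s3 q.2 w) s3) (H, deg, bk1)).1, ((PySem.List.enumerate (pvRowA H v).keys 0).foldl (fun s3 q =>
          (PySem.List.slice (pvRowA H v).keys (some (q.1+1)) none).foldl
            (fun s3 w => pvFillB idx v s3 q.2 w) s3) (H, deg, bk1)).2.1, ((PySem.List.enumerate (pvRowA H v).keys 0).foldl (fun s3 q =>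
          (PySem.List.slice (pvRowA H v).keys (some (q.1+1)) none).foldl
            (fun s3 w => pvFillB idx v s3 q.2 w) s3) (H, deg, bk1)).2.2, p1)).1.erase v,
       ((pvRowA H v).keys.foldl (pvDelStepB idx v)
        (((PySem.List.enumerate (pvRowA H v).keys 0).foldl (fun s3 q =>
          (PySem.List.slice (pvRowA H v).keys (some (q.1+1)) none).foldl
            (fun s3 w => pvFillB idx v s3 q.2 w) s3) (H, deg, bk1)).1, ((PySem.List.enumerate (pvRowA H v).keys 0).foldl (fun s3 q =>
          (PySem.List.slice (pvRowA H v).keys (some (q.1+1)) none).foldl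
            (fun s3 w => pvFillB idx v s3 q.2 w) s3) (H, deg, bk1)).2.1, ((PySem.List.enumerate (pvRowA H v).keys 0).foldl (fun s3 q =>
          (PySem.List.slice (pvRowA H v).keys (some (q.1+1)) none).foldl
            (fun s3 w => pvFillB idx v s3 q.2 w) s3) (H, deg, bk1)).2.2, p1)).2.1.erase v,
       ((pvRowA H v).keys.foldl (pvDelStepB idx v)
        (((PySem.List.enumerate (pvRowA H v).keys 0).foldl (fun s3 q =>
          (PySem.List.slice (pvRowA H v).keys (some (q.1+1)) none).foldl
            (fun s3 w => pvFillB idx v s3 q.2 w) s3) (H, deg, bk1)).1, ((PySem.List.enumerate (pvRowA H v).keys 0).foldl (fun s3 q =>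
          (PySem.List.slice (pvRowA H v).keys (some (q.1+1)) none).foldl
            (fun s3 w => pvFillB idx v s3 q.2 w) s3) (H, deg, bk1)).2.1, ((PySem.List.enumerate (pvRowA H v).keys 0).foldl (fun s3 q =>
          (PySem.List.slice (pvRowA H v).keys (some (q.1+1)) none).foldl
            (fun s3 w => pvFillB idx v s3 q.2 w) s3) (H, deg, bk1)).2.2, p1)).2.2.1,
       ((pvRowA H v).keys.foldl (pvDelStepB idx v)
        (((PySem.List.enumerate (pvRowA H v).keys 0).foldl (fun s3 q =>
          (PySem.List.slice (pvRowA H v).keys (some (q.1+1)) none).foldl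
            (fun s3 w => pvFillB idx v s3 q.2 w) s3) (H, deg, bk1)).1, ((PySem.List.enumerate (pvRowA H v).keys 0).foldl (fun s3 q =>
          (PySem.List.slice (pvRowA H v).keys (some (q.1+1)) none).foldl
            (fun s3 w => pvFillB idx v s3 q.2 w) s3) (H, deg, bk1)).2.1, ((PySem.List.enumerate (pvRowA H v).keys 0).foldl (fun s3 q =>
          (PySem.List.slice (pvRowA H v).keys (some (q.1+1)) none).foldl
            (fun s3 w => pvFillB idx v s3 q.2 w) s3) (H, deg, bk1)).2.2, p1)).2.2.2,
       PySem.Set.discard alive v,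
       trace ++ [(v, (pvRowA H v).keys,
         (pvRowA H v).keys.map (fun u => (pvRowA H v).getD u 0))]) := by
  rw [show pvStepB idx (H, deg, buckets, p, alive, trace) i
      = (match pvExtractB alive deg idx (alive.length + 1) buckets p with
        | none => (H, deg, buckets, p, alive, trace)
        | some (v, p1, bk1) =>
          (((pvRowA H v).keys.foldl (pvDelStepB idx v)
        (((PySem.List.enumerate (pvRowA H v).keys 0).foldl (fun s3 q =>
          (PySem.List.slice (pvRowA H v).keys (some (q.1+1)) none).foldl
            (fun s3 w => pvFillB idx v s3 q.2 w) s3) (H, deg, bk1)).1, ((PySem.List.enumerate (pvRowA H v).keys 0).foldl (fun s3 q =>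
          (PySem.List.slice (pvRowA H v).keys (some (q.1+1)) none).foldl
            (fun s3 w => pvFillB idx v s3 q.2 w) s3) (H, deg, bk1)).2.1, ((PySem.List.enumerate (pvRowA H v).keys 0).foldl (fun s3 q =>
          (PySem.List.slice (pvRowA H v).keys (some (q.1+1)) none).foldl
            (fun s3 w => pvFillB idx v s3 q.2 w) s3) (H, deg, bk1)).2.2, p1)).1.erase v,
           ((pvRowA H v).keys.foldl (pvDelStepB idx v)
        (((PySem.List.enumerate (pvRowA H v).keys 0).foldl (fun s3 q =>
          (PySem.List.slice (pvRowA H v).keys (some (q.1+1)) none).foldl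
            (fun s3 w => pvFillB idx v s3 q.2 w) s3) (H, deg, bk1)).1, ((PySem.List.enumerate (pvRowA H v).keys 0).foldl (fun s3 q =>
          (PySem.List.slice (pvRowA H v).keys (some (q.1+1)) none).foldl
            (fun s3 w => pvFillB idx v s3 q.2 w) s3) (H, deg, bk1)).2.1, ((PySem.List.enumerate (pvRowA H v).keys 0).foldl (fun s3 q =>
          (PySem.List.slice (pvRowA H v).keys (some (q.1+1)) none).foldl
            (fun s3 w => pvFillB idx v s3 q.2 w) s3) (H, deg, bk1)).2.2, p1)).2.1.erase v,
           ((pvRowA H v).keys.foldl (pvDelStepB idx v)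
        (((PySem.List.enumerate (pvRowA H v).keys 0).foldl (fun s3 q =>
          (PySem.List.slice (pvRowA H v).keys (some (q.1+1)) none).foldl
            (fun s3 w => pvFillB idx v s3 q.2 w) s3) (H, deg, bk1)).1, ((PySem.List.enumerate (pvRowA H v).keys 0).foldl (fun s3 q =>
          (PySem.List.slice (pvRowA H v).keys (some (q.1+1)) none).foldl
            (fun s3 w => pvFillB idx v s3 q.2 w) s3) (H, deg, bk1)).2.1, ((PySem.List.enumerate (pvRowA H v).keys 0).foldl (fun s3 q =>
          (PySem.List.slice (pvRowA H v).keys (some (q.1+1)) none).foldl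
            (fun s3 w => pvFillB idx v s3 q.2 w) s3) (H, deg, bk1)).2.2, p1)).2.2.1,
           ((pvRowA H v).keys.foldl (pvDelStepB idx v)
        (((PySem.List.enumerate (pvRowA H v).keys 0).foldl (fun s3 q =>
          (PySem.List.slice (pvRowA H v).keys (some (q.1+1)) none).foldl
            (fun s3 w => pvFillB idx v s3 q.2 w) s3) (H, deg, bk1)).1, ((PySem.List.enumerate (pvRowA H v).keys 0).foldl (fun s3 q =>
          (PySem.List.slice (pvRowA H v).keys (some (q.1+1)) none).foldl
            (fun s3 w => pvFillB idx v s3 q.2 w) s3) (H, deg, bk1)).2.1, ((PySem.List.enumerate (pvRowA H v).keys 0).foldl (fun s3 q =>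
          (PySem.List.slice (pvRowA H v).keys (some (q.1+1)) none).foldl
            (fun s3 w => pvFillB idx v s3 q.2 w) s3) (H, deg, bk1)).2.2, p1)).2.2.2,
           PySem.Set.discard alive v,
           trace ++ [(v, (pvRowA H v).keys,
             (pvRowA H v).keys.map (fun u => (pvRowA H v).getD u 0))])) from rfl, hx]

set_option maxHeartbeats 1600000 in
theorem pvLoopB_sim (idx : PySem.Dict Int Int) : ∀ (k : Nat)
    (H : PySem.Dict Int (PySem.Dict Int Int)) (deg : PySem.Dict Int Int)
    (buckets : PySem.Dict Int (List (Int × Int))) (p : Int)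
    (bags lambdas : PySem.Dict Int (List Int)) (phi : PySem.Dict Int Int)
    (trace : List (Int × List Int × List Int)),
    pvInv H deg → H.keys.length = k →
    H.keys.Pairwise (fun a b => idx.getD a 0 < idx.getD b 0) →
    (∀ u ∈ H.keys, (idx.getD u 0, u) ∈ buckets.getD (deg.getD u 0) []) →
    (∀ u ∈ H.keys, p ≤ deg.getD u 0) →
    0 ≤ p →
    bags.items = trace.map (fun t => (t.1, t.1 :: t.2.1)) →
    lambdas.items = trace.map (fun t => (t.1, (0:Int) :: t.2.2)) →
    phi.items = (PySem.List.enumerate trace 1).map (fun q => (q.2.1, q.1)) →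
    (∀ t ∈ trace, t.1 ∉ H.keys) →
    (trace.map (fun t => t.1)).Nodup →
    (∀ t ∈ trace, t.2.2.length = t.2.1.length) →
    (((PySem.List.pyRange ((trace.length : Int) + 1) ((trace.length : Int) + 1 + (k : Int)) 1).foldl
        pvStepA (H, bags, lambdas, phi)).2.1.items
      = (pvIter (fun s => pvStepB idx s 0) k (H, deg, buckets, p, H.keys, trace)).2.2.2.2.2.map
          (fun t => (t.1, t.1 :: t.2.1))) ∧
    (((PySem.List.pyRange ((trace.length : Int) + 1) ((trace.length : Int) + 1 + (k : Int)) 1).foldl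
        pvStepA (H, bags, lambdas, phi)).2.2.1.items
      = (pvIter (fun s => pvStepB idx s 0) k (H, deg, buckets, p, H.keys, trace)).2.2.2.2.2.map
          (fun t => (t.1, (0:Int) :: t.2.2))) ∧
    (((PySem.List.pyRange ((trace.length : Int) + 1) ((trace.length : Int) + 1 + (k : Int)) 1).foldl
        pvStepA (H, bags, lambdas, phi)).2.2.2.items
      = (PySem.List.enumerate
          ((pvIter (fun s => pvStepB idx s 0) k (H, deg, buckets, p, H.keys, trace)).2.2.2.2.2) 1).map
          (fun q => (q.2.1, q.1))) ∧
    (((pvIter (fun s => pvStepB idx s 0) k (H, deg, buckets, p, H.keys, trace)).2.2.2.2.2.map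
        (fun t => t.1)).Nodup) ∧
    (∀ t ∈ (pvIter (fun s => pvStepB idx s 0) k (H, deg, buckets, p, H.keys, trace)).2.2.2.2.2,
      t.2.2.length = t.2.1.length) := by
  intro k
  induction k with
  | zero =>
      intro H deg buckets p bags lambdas phi trace hI hlen hpw hcomp hp hp0 hb hl hph hdisj hnd hws
      rw [PySem.List.pyRange_one_eq_nil (by push_cast; omega)]
      exact ⟨hb, hl, hph, hnd, hws⟩
  | succ k ih =>
      intro H deg buckets p bags lambdas phi trace hI hlen hpw hcomp hp hp0 hb hl hph hdisj hnd hws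
      have hne : H.keys ≠ [] := by
        intro h; rw [h] at hlen; simp at hlen
      obtain ⟨v0, hv0⟩ := List.exists_mem_of_ne_nil H.keys hne
      have hfuel : deg.getD v0 0 < p + ((H.keys.length + 1 : Nat) : Int) := by
        have h1 := pvDeg_lt H deg hI v0 hv0
        push_cast
        omega
      obtain ⟨v, bk1, hx, hminB, hvk, hvmin, hcomp1⟩ :=
        pvExtract_spec H deg idx v0 hv0 hI.1 hpw (H.keys.length + 1) buckets p hcomp hp hfuel
      have hminA : PySem.List.min? H.keys
          (fun u => ((H.getD u PySem.Dict.empty).size : Int)) = some v := by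
        rw [pvMin?_congr H.keys (fun u => ((H.getD u PySem.Dict.empty).size : Int))
          (fun u => deg.getD u 0) (fun y hy => (hI.2.1 y hy).symm)]
        exact hminB
      have hcvk : H.contains v = true := (PySem.Dict.contains_iff_mem_keys _ _).2 hvk
      -- peel the A-side range
      rw [PySem.List.pyRange_one_cons (by push_cast; omega), List.foldl_cons]
      -- peel the B-side iterate and rewrite the extracted step
      simp only [pvIter]
      rw [pvStepB_eq idx H deg buckets p H.keys trace v (deg.getD v 0) bk1 hx 0]
      rw [pvFoldB_pairs (fun s u w => pvFillB idx v s u w) (pvRowA H v).keys]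
      set S3 := (pvPairs (pvRowA H v).keys).foldl
        (fun s q => pvFillB idx v s q.1 q.2) (H, deg, bk1) with hS3def
      -- neighbour facts
      obtain ⟨hndk, hsz, hsym, hcl, hrnd, hnl⟩ := hI
      have hnbnd : (pvRowA H v).keys.Nodup := hrnd v
      have hnbsub : ∀ b ∈ (pvRowA H v).keys, b ∈ H.keys := by
        intro b hbm
        exact hcl v b ((PySem.Dict.contains_iff_mem_keys _ _).2 hbm)
      have hnbnv : v ∉ (pvRowA H v).keys := by
        intro hvm
        have := (PySem.Dict.contains_iff_mem_keys (pvRowA H v) v).2 hvm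
        rw [hnl v] at this
        cases this
      have hpairs_mem : ∀ q ∈ pvPairs (pvRowA H v).keys,
          q.1 ∈ H.keys ∧ q.2 ∈ H.keys ∧ q.1 ≠ q.2 ∧ q.1 ≠ v ∧ q.2 ≠ v := by
        intro q hq
        obtain ⟨h1, h2, h3⟩ := pvPairs_mem hnbnd q hq
        exact ⟨hnbsub _ h1, hnbsub _ h2, h3,
          fun he => hnbnv (he ▸ h1), fun he => hnbnv (he ▸ h2)⟩
      -- the fill phase
      obtain ⟨S3I, S3k, S3rv, S3comp, S3p⟩ := pvPairsFill_inv idx v (deg.getD v 0)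
        (pvPairs (pvRowA H v).keys) H deg bk1 ⟨hndk, hsz, hsym, hcl, hrnd, hnl⟩ hpairs_mem
        hcomp1 (fun a ha _hav => hvmin a ha)
      rw [← hS3def] at S3I S3k S3rv S3comp S3p
      have hS3fst : S3.1
          = (pvPairs (pvRowA H v).keys).foldl (fun s q => pvStepPairA v s q.1 q.2) H := by
        rw [hS3def]
        exact pvFoldl_fst (pvPairs (pvRowA H v).keys) _ _
          (fun s q => pvFillB_fst idx v s q.1 q.2) (H, deg, bk1)
      -- the deletion phase hypotheses
      have hcv : ∀ u ∈ (pvRowA H v).keys, (pvRowA S3.1 u).contains v = true := by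
        intro u hu
        rw [S3I.2.2.1 u v, S3rv]
        exact (PySem.Dict.contains_iff_mem_keys _ _).2 hu
      have hkS3 : ∀ u ∈ (pvRowA H v).keys, u ∈ S3.1.keys := by
        intro u hu
        rw [S3k]
        exact hnbsub u hu
      obtain ⟨A1, A2, A3, A4, A5, A6, A7⟩ := pvDelFoldAB idx v (pvRowA H v).keys
        S3.1 S3.2.1 S3.2.2 (deg.getD v 0) hnbnd hcv hkS3
      set S4 := (pvRowA H v).keys.foldl (pvDelStepB idx v)
        (S3.1, S3.2.1, S3.2.2, deg.getD v 0) with hS4def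
      -- A's elimination equals the deletion phase result
      have hAelim : dp_vertex_elim H v = S4.1.erase v := by
        rw [A1, pvElimA_char H v hcvk, hS3fst]
      -- invariants of the new state
      obtain ⟨hIfin, hkfin⟩ := pvElimFinal_inv' v S3.1 S3.2.1 S4.2.1
        (pvRowA H v).keys S3I (by rw [S3k]; exact hvk) (by rw [S3rv]) A2
      rw [← A1] at hIfin hkfin
      rw [S3k] at hkfin
      rw [← hAelim] at hIfin hkfin
      -- t0 and freshness
      have hvfresh : v ∉ trace.map (fun t => t.1) := by
        intro hmem
        rcases List.mem_map.1 hmem with ⟨t, ht, hteq⟩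
        exact (hdisj t ht) (hteq ▸ hvk)
      have hbagsk : bags.keys = trace.map (fun t => t.1) := by
        rw [pvKeys_eq_map_fst bags hb, List.map_map]
        rfl
      have hlamk : lambdas.keys = trace.map (fun t => t.1) := by
        rw [pvKeys_eq_map_fst lambdas hl, List.map_map]
        rfl
      have hphik : phi.keys = trace.map (fun t => t.1) := by
        rw [pvKeys_eq_map_fst phi hph, List.map_map]
        have h2 : (PySem.List.enumerate trace 1).map (fun q => q.2.1)
            = trace.map (fun t => t.1) := by
          have h3 := PySem.List.map_snd_enumerate trace (1 : Int)
          calc (PySem.List.enumerate trace 1).map (fun q => q.2.1)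
              = ((PySem.List.enumerate trace 1).map (fun q => q.2)).map (fun t => t.1) := by
                rw [List.map_map]; rfl
            _ = trace.map (fun t => t.1) := by rw [h3]
        rw [← h2]
        rfl
      -- the A-side step
      have hstepA : pvStepA (H, bags, lambdas, phi) ((trace.length : Int) + 1)
          = (dp_vertex_elim H v,
             bags.insert v (v :: (pvRowA H v).keys),
             lambdas.insert v ((0:Int) :: (pvRowA H v).keys.map (fun u => (pvRowA H v).getD u 0)),
             phi.insert v ((trace.length : Int) + 1)) := by
        unfold pvStepA
        rw [show PySem.List.min? (H, bags, lambdas, phi).1.keys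
            (fun u => (((H, bags, lambdas, phi).1.getD u PySem.Dict.empty).size : Int)) = some v
          from hminA]
        dsimp only
        rw [pvFoldl_append_map]
        rfl
      rw [hstepA]
      -- bookkeeping of the output dicts
      have hbags' : (bags.insert v (v :: (pvRowA H v).keys)).items
          = (trace ++ [(v, (pvRowA H v).keys,
              (pvRowA H v).keys.map (fun u => (pvRowA H v).getD u 0))]).map
            (fun t => (t.1, t.1 :: t.2.1)) := by
        rw [PySem.Dict.items_insert_of_not_contains _ _
          (pvContains_false_of_not_mem _ (by rw [hbagsk]; exact hvfresh)), hb, List.map_append]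
        rfl
      have hlam' : (lambdas.insert v
            ((0:Int) :: (pvRowA H v).keys.map (fun u => (pvRowA H v).getD u 0))).items
          = (trace ++ [(v, (pvRowA H v).keys,
              (pvRowA H v).keys.map (fun u => (pvRowA H v).getD u 0))]).map
            (fun t => (t.1, (0:Int) :: t.2.2)) := by
        rw [PySem.Dict.items_insert_of_not_contains _ _
          (pvContains_false_of_not_mem _ (by rw [hlamk]; exact hvfresh)), hl, List.map_append]
        rfl
      have hphi' : (phi.insert v ((trace.length : Int) + 1)).items
          = (PySem.List.enumerate (trace ++ [(v, (pvRowA H v).keys,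
              (pvRowA H v).keys.map (fun u => (pvRowA H v).getD u 0))]) 1).map
            (fun q => (q.2.1, q.1)) := by
        rw [PySem.Dict.items_insert_of_not_contains _ _
          (pvContains_false_of_not_mem _ (by rw [hphik]; exact hvfresh)), hph,
          PySem.List.enumerate_append, List.map_append]
        have h4 : (PySem.List.enumerate [(v, (pvRowA H v).keys,
            (pvRowA H v).keys.map (fun u => (pvRowA H v).getD u 0))]
              (1 + (trace.length : Int))).map (fun q => (q.2.1, q.1))
            = [(v, (trace.length : Int) + 1)] := by
          show [((v : Int), 1 + (trace.length : Int))] = _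
          norm_num [add_comm]
        rw [h4]
      -- invariants for the induction hypothesis
      have hlen' : (dp_vertex_elim H v).keys.length = k := by
        rw [hkfin, List.length_erase_of_mem hvk, hlen]
        omega
      have hpw' : (dp_vertex_elim H v).keys.Pairwise
          (fun a b => idx.getD a 0 < idx.getD b 0) := by
        rw [hkfin]
        exact List.Pairwise.sublist List.erase_sublist hpw
      have hmemE : ∀ u ∈ (dp_vertex_elim H v).keys, u ≠ v ∧ u ∈ H.keys := by
        intro u hu
        rw [hkfin] at hu
        exact (List.Nodup.mem_erase_iff hndk).1 hu
      -- new-state bucket/priority invariants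
      have hcomp' : ∀ u ∈ (dp_vertex_elim H v).keys,
          (idx.getD u 0, u) ∈ S4.2.2.1.getD ((S4.2.1.erase v).getD u 0) [] := by
        intro u hu
        obtain ⟨huv, huk⟩ := hmemE u hu
        rw [pvDict_getD_erase_of_ne _ _ huv, A2 u]
        by_cases hun : u ∈ (pvRowA H v).keys
        · rw [if_pos hun]
          exact A4 u hun
        · rw [if_neg hun]
          exact A3 _ _ (S3comp u huk huv)
      have hp' : ∀ u ∈ (dp_vertex_elim H v).keys,
          S4.2.2.2 ≤ (S4.2.1.erase v).getD u 0 := by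
        intro u hu
        obtain ⟨huv, huk⟩ := hmemE u hu
        rw [pvDict_getD_erase_of_ne _ _ huv, A2 u]
        by_cases hun : u ∈ (pvRowA H v).keys
        · rw [if_pos hun]
          exact A6 u hun
        · rw [if_neg hun]
          exact le_trans A5 (S3p u huk huv)
      have hp0' : 0 ≤ S4.2.2.2 := by
        apply A7
        · rw [hsz v hvk]
          positivity
        · intro u hun
          have huk := hnbsub u hun
          have hvm : v ∈ (pvRowA S3.1 u).keys :=
            (PySem.Dict.contains_iff_mem_keys _ _).1 (hcv u hun)
          have hpos : 0 < (pvRowA S3.1 u).keys.length := List.length_pos_of_mem hvm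
          have hsz3 := S3I.2.1 u (by rw [S3k]; exact huk)
          have hsize : (pvRowA S3.1 u).size = (pvRowA S3.1 u).keys.length := by
            simp [PySem.Dict.size, PySem.Dict.keys]
          rw [hsz3, hsize]
          push_cast
          omega
      -- freshness for the extended trace
      have hdisj' : ∀ t ∈ trace ++ [(v, (pvRowA H v).keys,
          (pvRowA H v).keys.map (fun u => (pvRowA H v).getD u 0))], t.1 ∉ (dp_vertex_elim H v).keys := by
        intro t ht
        rw [hkfin]
        rcases List.mem_append.1 ht with h | h
        · intro hquer
          exact (hdisj t h) (List.mem_of_mem_erase hquer)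
        · have heq : t = (v, (pvRowA H v).keys,
          (pvRowA H v).keys.map (fun u => (pvRowA H v).getD u 0)) := by simpa using h
          rw [heq]
          intro hquer
          exact ((List.Nodup.mem_erase_iff hndk).1 hquer).1 rfl
      have hnd' : ((trace ++ [(v, (pvRowA H v).keys,
          (pvRowA H v).keys.map (fun u => (pvRowA H v).getD u 0))]).map (fun t => t.1)).Nodup := by
        rw [List.map_append]
        apply List.Nodup.append hnd (by simp)
        intro a ha hb'
        have hav : a = v := by simpa using hb'
        rw [hav] at ha
        exact hvfresh ha
      have hws' : ∀ t ∈ trace ++ [(v, (pvRowA H v).keys,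
          (pvRowA H v).keys.map (fun u => (pvRowA H v).getD u 0))], t.2.2.length = t.2.1.length := by
        intro t ht
        rcases List.mem_append.1 ht with h | h
        · exact hws t h
        · have heq : t = (v, (pvRowA H v).keys,
          (pvRowA H v).keys.map (fun u => (pvRowA H v).getD u 0)) := by simpa using h
          rw [heq]
          simp
      -- the induction hypothesis
      have hIH := ih (dp_vertex_elim H v) (S4.2.1.erase v) S4.2.2.1 S4.2.2.2
        (bags.insert v (v :: (pvRowA H v).keys))
        (lambdas.insert v ((0:Int) :: (pvRowA H v).keys.map (fun u => (pvRowA H v).getD u 0)))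
        (phi.insert v ((trace.length : Int) + 1))
        (trace ++ [(v, (pvRowA H v).keys,
          (pvRowA H v).keys.map (fun u => (pvRowA H v).getD u 0))]) hIfin hlen' hpw' hcomp' hp' hp0' hbags' hlam' hphi' hdisj' hnd' hws'
      have halive : PySem.Set.discard H.keys v = (dp_vertex_elim H v).keys := by
        rw [pvDiscard_eq_erase _ _ hndk, hkfin]
      have harith : (trace.length : Int) + 1 + 1
          = (((trace ++ [(v, (pvRowA H v).keys,
          (pvRowA H v).keys.map (fun u => (pvRowA H v).getD u 0))]).length : Int) + 1) := by
        simp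
      have harith2 : (trace.length : Int) + 1 + ((k + 1 : Nat) : Int)
          = (((trace ++ [(v, (pvRowA H v).keys,
          (pvRowA H v).keys.map (fun u => (pvRowA H v).getD u 0))]).length : Int) + 1) + (k : Int) := by
        simp only [List.length_append, List.length_cons, List.length_nil]
        push_cast
        ring
      rw [← hAelim, halive, harith, harith2]
      exact hIH

-- ---- build phase ----

def pvRegA (H : PySem.Dict Int (PySem.Dict Int Int)) (x : Int) :
    PySem.Dict Int (PySem.Dict Int Int) :=
  if H.contains x = false then H.insert x PySem.Dict.empty else H

def pvEdgeA (u : Int) (H : PySem.Dict Int (PySem.Dict Int Int)) (v : Int) :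
    PySem.Dict Int (PySem.Dict Int Int) :=
  if (pvRowA H u).contains v = false ∨ 1 < (pvRowA H u).getD v 0 then
    let H' := H.insert u ((pvRowA H u).insert v 1)
    H'.insert v ((pvRowA H' v).insert u 1)
  else H

def pvBuildInnerA (u : Int) (H : PySem.Dict Int (PySem.Dict Int Int)) (v : Int) :
    PySem.Dict Int (PySem.Dict Int Int) :=
  pvEdgeA u (pvRegA H v) v

def pvBuildStepA (H : PySem.Dict Int (PySem.Dict Int Int)) (q : Int × List Int) :
    PySem.Dict Int (PySem.Dict Int Int) :=
  q.2.foldl (pvBuildInnerA q.1) (pvRegA H q.1)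

def pvInv0 (H : PySem.Dict Int (PySem.Dict Int Int)) : Prop :=
  H.keys.Nodup ∧
  (∀ a b : Int, (pvRowA H a).contains b = (pvRowA H b).contains a) ∧
  (∀ a b : Int, (pvRowA H a).contains b = true → b ∈ H.keys) ∧
  (∀ a : Int, (pvRowA H a).keys.Nodup) ∧
  (∀ a : Int, (pvRowA H a).contains a = false)

def pvWt (H : PySem.Dict Int (PySem.Dict Int Int)) : Prop :=
  ∀ a b : Int, (pvRowA H a).contains b = true → (pvRowA H a).getD b 0 = 1

def pvIdxInv (idx : PySem.Dict Int Int) (ord : List Int) : Prop :=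
  ord.Pairwise (fun a b => idx.getD a 0 < idx.getD b 0) ∧
  (∀ u ∈ ord, idx.getD u 0 < (ord.length : Int))

theorem pvReg_inv' (H : PySem.Dict Int (PySem.Dict Int Int)) (idx : PySem.Dict Int Int) (x : Int)
    (hI : pvInv0 H) (hW : pvWt H) (hx : pvIdxInv idx H.keys) :
    (pvRegB (H, idx, H.keys) x).1 = pvRegA H x ∧
    (pvRegB (H, idx, H.keys) x).2.2 = (pvRegA H x).keys ∧
    pvInv0 (pvRegA H x) ∧ pvWt (pvRegA H x) ∧
    pvIdxInv (pvRegB (H, idx, H.keys) x).2.1 (pvRegA H x).keys ∧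
    x ∈ (pvRegA H x).keys ∧ (∀ y ∈ H.keys, y ∈ (pvRegA H x).keys) := by
  obtain ⟨hnd, hsym, hcl, hrnd, hnl⟩ := hI
  obtain ⟨hpw, hbound⟩ := hx
  unfold pvRegA pvRegB
  dsimp only
  by_cases hc : H.contains x = false
  · have hxk : x ∉ H.keys := by
      intro hm
      rw [(PySem.Dict.contains_iff_mem_keys H x).2 hm] at hc
      cases hc
    rw [if_pos hc, if_pos hc]
    have hkeys : (H.insert x PySem.Dict.empty).keys = H.keys ++ [x] :=
      PySem.Dict.keys_insert_of_not_contains _ _ hc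
    have hrows : ∀ a : Int, pvRowA (H.insert x PySem.Dict.empty) a = pvRowA H a := by
      intro a
      rw [pvRow_insert]
      by_cases hax : a = x
      · rw [if_pos hax, hax, pvRow_not_mem H hxk]
      · rw [if_neg hax]
    have hidx : ∀ y ∈ H.keys, (idx.insert x (H.keys.length : Int)).getD y 0 = idx.getD y 0 := by
      intro y hy
      rw [PySem.Dict.getD_insert, if_neg (fun he => hxk (by rw [← he]; exact hy))]
    have hidxx : (idx.insert x (H.keys.length : Int)).getD x 0 = (H.keys.length : Int) := by
      rw [PySem.Dict.getD_insert, if_pos rfl]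
    refine ⟨rfl, by rw [hkeys], ⟨?_, ?_, ?_, ?_, ?_⟩, ?_, ⟨?_, ?_⟩, ?_, ?_⟩
    · rw [hkeys]
      apply List.Nodup.append hnd (List.nodup_singleton x)
      intro a ha hb
      have : a = x := by simpa using hb
      exact hxk (this ▸ ha)
    · intro a b; rw [hrows a, hrows b]; exact hsym a b
    · intro a b hab
      rw [hrows a] at hab
      rw [hkeys]
      exact List.mem_append.2 (Or.inl (hcl a b hab))
    · intro a; rw [hrows a]; exact hrnd a
    · intro a; rw [hrows a]; exact hnl a
    · intro a b hab
      rw [hrows a] at hab ⊢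
      exact hW a b hab
    · rw [hkeys]
      apply List.pairwise_append.2
      refine ⟨?_, List.pairwise_singleton _ _, ?_⟩
      · apply List.Pairwise.imp_of_mem ?_ hpw
        intro a b ha hb hab
        rw [hidx a ha, hidx b hb]
        exact hab
      · intro a ha b hb
        have : b = x := by simpa using hb
        subst this
        rw [hidx a ha, hidxx]
        exact hbound a ha
    · intro y hy
      dsimp only
      rw [hkeys] at hy ⊢
      have hlen : (((H.keys ++ [x]).length : Int)) = (H.keys.length : Int) + 1 := by
        simp
      rw [hlen]
      rcases List.mem_append.1 hy with h | h
      · rw [hidx y h]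
        have := hbound y h
        omega
      · have : y = x := by simpa using h
        subst this
        rw [hidxx]
        omega
    · rw [hkeys]; simp
    · intro y hy; rw [hkeys]; exact List.mem_append.2 (Or.inl hy)
  · rw [if_neg hc, if_neg hc]
    have hxk : x ∈ H.keys := by
      rcases hcc : H.contains x with _ | _
      · exact absurd hcc hc
      · exact (PySem.Dict.contains_iff_mem_keys H x).1 hcc
    exact ⟨rfl, rfl, ⟨hnd, hsym, hcl, hrnd, hnl⟩, hW, ⟨hpw, hbound⟩, hxk, fun y hy => hy⟩

theorem pvEdgeCore_inv (u : Int) (H2 : PySem.Dict Int (PySem.Dict Int Int)) (v : Int)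
    (hI : pvInv0 H2) (hW : pvWt H2) (hu : u ∈ H2.keys) (hv : v ∈ H2.keys) (hvu : v ≠ u) :
    (if (pvRowA H2 u).contains v = false then
        (H2.insert u ((pvRowA H2 u).insert v 1)).insert v
          ((pvRowA (H2.insert u ((pvRowA H2 u).insert v 1)) v).insert u 1)
      else H2) = pvEdgeA u H2 v ∧
    pvInv0 (pvEdgeA u H2 v) ∧ pvWt (pvEdgeA u H2 v) ∧ (pvEdgeA u H2 v).keys = H2.keys := by
  obtain ⟨hnd, hsym, hcl, hrnd, hnl⟩ := hI
  have huv : u ≠ v := Ne.symm hvu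
  unfold pvEdgeA
  dsimp only
  by_cases hc : (pvRowA H2 u).contains v = false
  · rw [if_pos hc, if_pos (Or.inl hc)]
    have hrow2 : ∀ a : Int,
        pvRowA ((H2.insert u ((pvRowA H2 u).insert v 1)).insert v
          ((pvRowA (H2.insert u ((pvRowA H2 u).insert v 1)) v).insert u 1)) a
        = if a = v then (pvRowA H2 v).insert u 1
          else if a = u then (pvRowA H2 u).insert v 1
          else pvRowA H2 a := by
      intro a
      rw [pvRow_insert, pvRow_insert, if_neg hvu, pvRow_insert]
    have hkeys : ((H2.insert u ((pvRowA H2 u).insert v 1)).insert v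
        ((pvRowA (H2.insert u ((pvRowA H2 u).insert v 1)) v).insert u 1)).keys = H2.keys := by
      rw [PySem.Dict.keys_insert_of_contains, PySem.Dict.keys_insert_of_contains]
      · exact (PySem.Dict.contains_iff_mem_keys H2 u).2 hu
      · rw [PySem.Dict.contains_insert]
        have : H2.contains v = true := (PySem.Dict.contains_iff_mem_keys H2 v).2 hv
        simp [this]
    refine ⟨rfl, ⟨?_, ?_, ?_, ?_, ?_⟩, ?_, hkeys⟩
    · rw [hkeys]; exact hnd
    · intro a b
      rw [hrow2 a, hrow2 b]
      have h0 := hsym a b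
      have h1 := hsym a v
      have h2 := hsym a u
      have h3 := hsym v b
      have h4 := hsym u b
      have h5 := hnl v
      have h6 := hnl u
      clear hsym hcl hrnd hnd hnl hrow2 hkeys
      by_cases e1 : a = v <;> by_cases e2 : a = u <;> by_cases e3 : b = v <;> by_cases e4 : b = u <;>
        simp_all [PySem.Dict.contains_insert]
    · intro a b hab
      rw [hkeys]
      rw [hrow2 a] at hab
      by_cases e1 : a = v
      · rw [if_pos e1, PySem.Dict.contains_insert] at hab
        simp only [Bool.or_eq_true, beq_iff_eq] at hab
        rcases hab with h | h
        · subst h; exact hu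
        · exact hcl v b h
      · rw [if_neg e1] at hab
        by_cases e2 : a = u
        · rw [if_pos e2, PySem.Dict.contains_insert] at hab
          simp only [Bool.or_eq_true, beq_iff_eq] at hab
          rcases hab with h | h
          · subst h; exact hv
          · exact hcl u b h
        · rw [if_neg e2] at hab
          exact hcl a b hab
    · intro a
      rw [hrow2 a]
      by_cases e1 : a = v
      · rw [if_pos e1]; exact PySem.Dict.nodup_keys_insert _ _ _ (hrnd v)
      · rw [if_neg e1]
        by_cases e2 : a = u
        · rw [if_pos e2]; exact PySem.Dict.nodup_keys_insert _ _ _ (hrnd u)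
        · rw [if_neg e2]; exact hrnd a
    · intro a
      rw [hrow2 a]
      have h5 := hnl v
      have h6 := hnl u
      have h7 := hnl a
      clear hsym hcl hrnd hnd hnl hrow2 hkeys
      by_cases e1 : a = v <;> by_cases e2 : a = u <;>
        simp_all [PySem.Dict.contains_insert]
    · intro a b hab
      rw [hrow2 a] at hab ⊢
      have hWu := hW u
      have hWv := hW v
      have hWa := hW a
      by_cases e1 : a = v
      · rw [if_pos e1] at hab ⊢
        rw [PySem.Dict.contains_insert] at hab
        simp only [Bool.or_eq_true, beq_iff_eq] at hab
        by_cases hbu : b = u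
        · rw [hbu, PySem.Dict.getD_insert, if_pos rfl]
        · rcases hab with h | h
          · exact absurd h hbu
          · rw [PySem.Dict.getD_insert, if_neg hbu]
            exact hWv b h
      · rw [if_neg e1] at hab ⊢
        by_cases e2 : a = u
        · rw [if_pos e2] at hab ⊢
          rw [PySem.Dict.contains_insert] at hab
          simp only [Bool.or_eq_true, beq_iff_eq] at hab
          by_cases hbv : b = v
          · rw [hbv, PySem.Dict.getD_insert, if_pos rfl]
          · rcases hab with h | h
            · exact absurd h hbv
            · rw [PySem.Dict.getD_insert, if_neg hbv]
              exact hWu b h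
        · rw [if_neg e2] at hab ⊢
          exact hWa b hab
  · have hc' : (pvRowA H2 u).contains v = true := by
      rcases h : (pvRowA H2 u).contains v with _ | _
      · exact absurd h hc
      · rfl
    rw [if_neg hc]
    rw [if_neg ?_]
    · exact ⟨rfl, ⟨hnd, hsym, hcl, hrnd, hnl⟩, hW, rfl⟩
    · rintro (h | h)
      · exact hc h
      · rw [hW u v hc'] at h
        exact lt_irrefl 1 h

theorem pvInner_inv (u : Int) (H : PySem.Dict Int (PySem.Dict Int Int))
    (idx : PySem.Dict Int Int) (v : Int)
    (hI : pvInv0 H) (hW : pvWt H) (hx : pvIdxInv idx H.keys) (hu : u ∈ H.keys) (hvu : v ≠ u) :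
    (pvEdgeB u (H, idx, H.keys) v).1 = pvBuildInnerA u H v ∧
    (pvEdgeB u (H, idx, H.keys) v).2.2 = (pvBuildInnerA u H v).keys ∧
    pvInv0 (pvBuildInnerA u H v) ∧ pvWt (pvBuildInnerA u H v) ∧
    pvIdxInv (pvEdgeB u (H, idx, H.keys) v).2.1 (pvBuildInnerA u H v).keys ∧
    u ∈ (pvBuildInnerA u H v).keys ∧ (∀ y ∈ H.keys, y ∈ (pvBuildInnerA u H v).keys) := by
  obtain ⟨r1, r2, rI, rW, rX, rv, rmono⟩ := pvReg_inv' H idx v hI hW hx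
  have hreg : pvRegB (H, idx, H.keys) v
      = (pvRegA H v, (pvRegB (H, idx, H.keys) v).2.1, (pvRegA H v).keys) := by
    rw [← r2, ← r1]
  obtain ⟨e1, eI, eW, ekeys⟩ := pvEdgeCore_inv u (pvRegA H v) v rI rW (rmono u hu) rv hvu
  have hstep : pvEdgeB u (H, idx, H.keys) v
      = (if (pvRowA (pvRegA H v) u).contains v = false then
          (pvRegA H v).insert u ((pvRowA (pvRegA H v) u).insert v 1) |>.insert v
            ((pvRowA ((pvRegA H v).insert u ((pvRowA (pvRegA H v) u).insert v 1)) v).insert u 1)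
        else pvRegA H v,
        (pvRegB (H, idx, H.keys) v).2.1, (pvRegA H v).keys) := by
    unfold pvEdgeB
    rw [hreg, pvRowB_eq]
    dsimp only
    split_ifs <;> rfl
  have hkeysv : (pvBuildInnerA u H v).keys = (pvRegA H v).keys := by
    unfold pvBuildInnerA
    exact ekeys
  refine ⟨?_, ?_, ?_, ?_, ?_, ?_, ?_⟩
  · rw [hstep]
    show (if _ then _ else _) = _
    rw [e1]
    rfl
  · rw [hstep]
    show (pvRegA H v).keys = _
    rw [hkeysv]
  · unfold pvBuildInnerA; exact eI
  · unfold pvBuildInnerA; exact eW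
  · rw [hstep]
    show pvIdxInv (pvRegB (H, idx, H.keys) v).2.1 _
    rw [hkeysv]
    exact rX
  · rw [hkeysv]; exact rmono u hu
  · intro y hy
    rw [hkeysv]
    exact rmono y hy

theorem pvInnerFold (u : Int) : ∀ (nbrs : List Int)
    (H : PySem.Dict Int (PySem.Dict Int Int)) (idx : PySem.Dict Int Int),
    pvInv0 H → pvWt H → pvIdxInv idx H.keys → u ∈ H.keys → (∀ v ∈ nbrs, v ≠ u) →
    (nbrs.foldl (pvEdgeB u) (H, idx, H.keys)).1 = nbrs.foldl (pvBuildInnerA u) H ∧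
    (nbrs.foldl (pvEdgeB u) (H, idx, H.keys)).2.2 = (nbrs.foldl (pvBuildInnerA u) H).keys ∧
    pvInv0 (nbrs.foldl (pvBuildInnerA u) H) ∧ pvWt (nbrs.foldl (pvBuildInnerA u) H) ∧
    pvIdxInv (nbrs.foldl (pvEdgeB u) (H, idx, H.keys)).2.1 (nbrs.foldl (pvBuildInnerA u) H).keys ∧
    u ∈ (nbrs.foldl (pvBuildInnerA u) H).keys ∧
    (∀ y ∈ H.keys, y ∈ (nbrs.foldl (pvBuildInnerA u) H).keys) := by
  intro nbrs
  induction nbrs with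
  | nil =>
      intro H idx hI hW hX hu _
      exact ⟨rfl, rfl, hI, hW, hX, hu, fun y hy => hy⟩
  | cons v t ih =>
      intro H idx hI hW hX hu hvu
      obtain ⟨i1, i2, iI, iW, iX, iu, imono⟩ := pvInner_inv u H idx v hI hW hX hu (hvu v (by simp))
      have hstep : pvEdgeB u (H, idx, H.keys) v
          = (pvBuildInnerA u H v, (pvEdgeB u (H, idx, H.keys) v).2.1,
             (pvBuildInnerA u H v).keys) := by
        rw [← i2, ← i1]
      simp only [List.foldl_cons]
      rw [hstep]
      obtain ⟨a1, a2, aI, aW, aX, au, amono⟩ := ih (pvBuildInnerA u H v)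
        (pvEdgeB u (H, idx, H.keys) v).2.1 iI iW iX iu (fun w hw => hvu w (by simp [hw]))
      exact ⟨a1, a2, aI, aW, aX, au, fun y hy => amono y (imono y hy)⟩

theorem pvBuildFold' : ∀ (l : List (Int × List Int))
    (H : PySem.Dict Int (PySem.Dict Int Int)) (idx : PySem.Dict Int Int),
    pvInv0 H → pvWt H → pvIdxInv idx H.keys → (∀ q ∈ l, ∀ v ∈ q.2, v ≠ q.1) →
    (l.foldl pvBuildStepB (H, idx, H.keys)).1 = l.foldl pvBuildStepA H ∧
    (l.foldl pvBuildStepB (H, idx, H.keys)).2.2 = (l.foldl pvBuildStepA H).keys ∧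
    pvInv0 (l.foldl pvBuildStepA H) ∧ pvWt (l.foldl pvBuildStepA H) ∧
    pvIdxInv (l.foldl pvBuildStepB (H, idx, H.keys)).2.1 (l.foldl pvBuildStepA H).keys := by
  intro l
  induction l with
  | nil => intro H idx hI hW hX _; exact ⟨rfl, rfl, hI, hW, hX⟩
  | cons q t ih =>
      intro H idx hI hW hX hpre
      obtain ⟨r1, r2, rI, rW, rX, rv, rmono⟩ := pvReg_inv' H idx q.1 hI hW hX
      have hreg : pvRegB (H, idx, H.keys) q.1
          = (pvRegA H q.1, (pvRegB (H, idx, H.keys) q.1).2.1, (pvRegA H q.1).keys) := by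
        rw [← r2, ← r1]
      obtain ⟨b1, b2, bI, bW, bX, bu, bmono⟩ := pvInnerFold q.1 q.2 (pvRegA H q.1)
        (pvRegB (H, idx, H.keys) q.1).2.1 rI rW rX rv (hpre q (by simp))
      have hstep : pvBuildStepB (H, idx, H.keys) q
          = (pvBuildStepA H q,
            (q.2.foldl (pvEdgeB q.1)
              (pvRegA H q.1, (pvRegB (H, idx, H.keys) q.1).2.1, (pvRegA H q.1).keys)).2.1,
            (pvBuildStepA H q).keys) := by
        unfold pvBuildStepB pvBuildStepA
        rw [hreg, ← b2, ← b1]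
      simp only [List.foldl_cons]
      rw [hstep]
      exact ih (pvBuildStepA H q) _ (by unfold pvBuildStepA; exact bI)
        (by unfold pvBuildStepA; exact bW) (by unfold pvBuildStepA; exact bX)
        (fun r hr => hpre r (by simp [hr]))

theorem pvInv0_empty : pvInv0 PySem.Dict.empty := by
  refine ⟨?_, ?_, ?_, ?_, ?_⟩ <;>
    simp [pvRowA, PySem.Dict.keys_empty, PySem.Dict.getD_empty, PySem.Dict.contains_empty]

theorem pvWt_empty : pvWt PySem.Dict.empty := by
  intro a b hab
  rw [pvRowA, PySem.Dict.getD_empty] at hab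
  simp [PySem.Dict.contains_empty] at hab

theorem pvBuildAB (g : List (Int × List Int)) (hpre : ∀ q ∈ g, ∀ v ∈ q.2, v ≠ q.1) :
    (g.foldl pvBuildStepB (PySem.Dict.empty, PySem.Dict.empty, ([] : List Int))).1
      = g.foldl pvBuildStepA PySem.Dict.empty ∧
    (g.foldl pvBuildStepB (PySem.Dict.empty, PySem.Dict.empty, ([] : List Int))).2.2
      = (g.foldl pvBuildStepA PySem.Dict.empty).keys ∧
    pvInv0 (g.foldl pvBuildStepA PySem.Dict.empty) ∧
    pvWt (g.foldl pvBuildStepA PySem.Dict.empty) ∧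
    pvIdxInv (g.foldl pvBuildStepB (PySem.Dict.empty, PySem.Dict.empty, ([] : List Int))).2.1
      (g.foldl pvBuildStepA PySem.Dict.empty).keys := by
  have h0 : ([] : List Int) = (PySem.Dict.empty : PySem.Dict Int (PySem.Dict Int Int)).keys := rfl
  have hX : pvIdxInv (PySem.Dict.empty : PySem.Dict Int Int)
      (PySem.Dict.empty : PySem.Dict Int (PySem.Dict Int Int)).keys := by
    constructor
    · exact List.Pairwise.nil
    · intro u hu
      cases hu
  have := pvBuildFold' g PySem.Dict.empty PySem.Dict.empty pvInv0_empty pvWt_empty hX hpre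
  exact this

theorem pvDegBuild (H : PySem.Dict Int (PySem.Dict Int Int)) (hnd : H.keys.Nodup) :
    ∀ u ∈ H.keys, (H.keys.foldl (fun d v => d.insert v ((pvRowA H v).size : Int))
      (PySem.Dict.empty : PySem.Dict Int Int)).getD u 0 = ((pvRowA H u).size : Int) := by
  intro u hu
  have hitems := PySem.Dict.items_foldl_insert_fresh H.keys (fun v => v)
    (fun v => ((pvRowA H v).size : Int)) PySem.Dict.empty
    (fun a _ => PySem.Dict.contains_empty _) (by simpa using hnd)
  have hmem : (u, ((pvRowA H u).size : Int)) ∈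
      (H.keys.foldl (fun d v => d.insert v ((pvRowA H v).size : Int))
        (PySem.Dict.empty : PySem.Dict Int Int)).items := by
    rw [hitems]
    exact List.mem_append.2 (Or.inr (List.mem_map.2 ⟨u, hu, rfl⟩))
  have hknd : (H.keys.foldl (fun d v => d.insert v ((pvRowA H v).size : Int))
      (PySem.Dict.empty : PySem.Dict Int Int)).keys.Nodup := by
    have : (H.keys.foldl (fun d v => d.insert v ((pvRowA H v).size : Int))
        (PySem.Dict.empty : PySem.Dict Int Int)).keys = H.keys := by
      rw [pvKeys_eq_map_fst _ hitems]
      show ((([] : List (Int × Int)) ++ H.keys.map fun a => (a, ((pvRowA H a).size : Int))).map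
        fun q => q.1) = H.keys
      simp [List.map_map, Function.comp_def]
    rw [this]; exact hnd
  exact PySem.Dict.getD_of_mem_items _ hmem hknd 0

theorem pvBAppFold_mono {β : Type} (kf : β → Int) (vf : β → Int × Int) :
    ∀ (l : List β) (b : PySem.Dict Int (List (Int × Int))) (e : Int × Int) (d : Int),
    e ∈ b.getD d [] → e ∈ (l.foldl (fun b x => pvBApp b (kf x) (vf x)) b).getD d [] := by
  intro l
  induction l with
  | nil => intro b e d he; exact he
  | cons x t ih =>
      intro b e d he
      exact ih _ e d (pvBApp_mono _ _ _ _ _ he)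

theorem pvBucketsBuild (deg idx : PySem.Dict Int Int) :
    ∀ (ord : List Int) (b : PySem.Dict Int (List (Int × Int))) (u : Int), u ∈ ord →
    (idx.getD u 0, u) ∈ (ord.foldl (fun b v => pvBApp b (deg.getD v 0) (idx.getD v 0, v)) b).getD
      (deg.getD u 0) [] := by
  intro ord
  induction ord with
  | nil => intro b u hu; cases hu
  | cons x t ih =>
      intro b u hu
      rcases List.mem_cons.1 hu with rfl | hut
      · simp only [List.foldl_cons]
        exact pvBAppFold_mono (fun v => deg.getD v 0) (fun v => (idx.getD v 0, v)) t _ _ _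
          (pvBApp_self _ _ _)
      · exact ih _ u hut

-- ---- output assembly ----

def pvParentVal (phi : PySem.Dict Int Int) (v : Int) (bag : List Int) : Option Int :=
  if 1 < bag.length then
    match PySem.List.min? (bag.filter (fun u => u != v)) (fun x => phi.getD x 0) with
    | some up => some up
    | none => none
  else none

theorem pvOverwriteFold {γ : Type} (F : Int → List Int → γ) (c : γ) :
    ∀ (l : List (Int × List Int)) (done : List (Int × γ)),
    ((l.map (fun q => q.1)).Nodup) →
    (∀ q ∈ done, ∀ r ∈ l, q.1 ≠ r.1) →
    (l.foldl (fun par q => par.insert q.1 (F q.1 q.2))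
        (PySem.Dict.mk (done ++ l.map (fun q => (q.1, c))))).items
      = done ++ l.map (fun q => (q.1, F q.1 q.2)) := by
  intro l
  induction l with
  | nil => intro done _ _; simp [PySem.Dict.items]
  | cons q t ih =>
      intro done hnd hdisj
      have hndh : q.1 ∉ t.map (fun r => r.1) := (List.nodup_cons.1 hnd).1
      have hndt : (t.map (fun r => r.1)).Nodup := (List.nodup_cons.1 hnd).2
      have hcont : (PySem.Dict.mk (done ++ (q :: t).map (fun r => (r.1, c)))).contains q.1 = true := by
        apply (PySem.Dict.contains_iff_mem_keys _ _).2
        show q.1 ∈ (done ++ (q :: t).map (fun r => (r.1, c))).map (fun r => r.1)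
        simp
      have hins : (PySem.Dict.mk (done ++ (q :: t).map (fun r => (r.1, c)))).insert q.1 (F q.1 q.2)
          = PySem.Dict.mk ((done ++ [(q.1, F q.1 q.2)]) ++ t.map (fun r => (r.1, c))) := by
        apply PySem.Dict.ext
        rw [PySem.Dict.items_insert_of_contains _ _ hcont]
        show (done ++ ((q.1, c) :: t.map (fun r => (r.1, c)))).map
            (fun r => if r.1 == q.1 then (q.1, F q.1 q.2) else r) = _
        rw [List.map_append]
        have h1 : done.map (fun r => if r.1 == q.1 then (q.1, F q.1 q.2) else r) = done := by
          conv_rhs => rw [← List.map_id done]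
          apply List.map_congr_left
          intro r hr
          have : (r.1 == q.1) = false := by
            simpa using hdisj r hr q (by simp)
          simp [this]
        have h2 : ((q.1, c) :: t.map (fun r => (r.1, c))).map
            (fun r => if r.1 == q.1 then (q.1, F q.1 q.2) else r)
            = (q.1, F q.1 q.2) :: t.map (fun r => (r.1, c)) := by
          rw [List.map_cons]
          congr 1
          · simp
          · rw [List.map_map]
            apply List.map_congr_left
            intro r hr
            have hne : (r.1 == q.1) = false := by
              have hmem : r.1 ∈ t.map (fun s => s.1) := List.mem_map.2 ⟨r, hr, rfl⟩
              have : r.1 ≠ q.1 := fun he => hndh (he ▸ hmem)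
              simpa using this
            simp [Function.comp_def, hne]
            intro he
            exact absurd he (by simpa using hne)
        rw [h1, h2]
        simp
      rw [List.foldl_cons, hins]
      have := ih (done ++ [(q.1, F q.1 q.2)]) hndt (by
        intro r hr q' hq'
        rcases List.mem_append.1 hr with h | h
        · exact hdisj r h q' (by simp [hq'])
        · have : r = (q.1, F q.1 q.2) := by simpa using h
          rw [this]
          intro he
          exact hndh (he ▸ List.mem_map.2 ⟨q', hq', rfl⟩))
      rw [this]
      simp

theorem pvParentVal_eq (phi : PySem.Dict Int Int) (v : Int) (nbrs : List Int) :
    pvParentVal phi v (v :: nbrs)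
      = PySem.List.min? (nbrs.filter (fun u => u != v)) (fun x => phi.getD x 0) := by
  unfold pvParentVal
  have hfil : (v :: nbrs).filter (fun u => u != v) = nbrs.filter (fun u => u != v) := by
    simp
  rw [hfil]
  by_cases hn : nbrs = []
  · rw [hn]
    simp
    rfl
  · rw [if_pos (by cases nbrs with | nil => exact absurd rfl hn | cons a l => simp)]
    rcases h : PySem.List.min? (nbrs.filter (fun u => u != v)) (fun x => phi.getD x 0) with _ | m
    · rfl
    · rfl

-- ---- the two programs, re-stated with the named pieces ----

def pvA (g : List (Int × List Int)) :
    (List (Int × List Int)) × (List (Int × List Int)) × (List (Int × Option Int)) × (List (Int × Int)) :=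
  let H := g.foldl pvBuildStepA PySem.Dict.empty
  let n := H.keys.length
  let st := (PySem.List.pyRange 1 ((n : Int)+1) 1).foldl pvStepA
    (H, (PySem.Dict.empty : PySem.Dict Int (List Int)),
        (PySem.Dict.empty : PySem.Dict Int (List Int)),
        (PySem.Dict.empty : PySem.Dict Int Int))
  let bags := st.2.1
  let lambdas := st.2.2.1
  let phi := st.2.2.2
  let parent := bags.keys.foldl (fun par v => par.insert v (none : Option Int))
      (PySem.Dict.empty : PySem.Dict Int (Option Int))
  let parent := bags.items.foldl (fun par q =>
      if 1 < q.2.length then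
        match PySem.List.min? (q.2.filter (fun u => u != q.1)) (fun x => phi.getD x 0) with
        | some up => par.insert q.1 (some up)
        | none => par.insert q.1 none
      else par.insert q.1 none) parent
  let bl := bags.keys.foldl (fun bl v =>
      let bag := bl.1.getD v []
      let lam := bl.2.getD v []
      let paired := bag.zip lam
      (bl.1.insert v (paired.map Prod.fst), bl.2.insert v (paired.map Prod.snd)))
    (bags, lambdas)
  (bl.1.items, bl.2.items, parent.items, phi.items)

theorem pvA_eq (g : List (Int × List Int)) : naive_dp_tree_decomposition g = pvA g := rfl

def pvB (g : List (Int × List Int)) :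
    (List (Int × List Int)) × (List (Int × List Int)) × (List (Int × Option Int)) × (List (Int × Int)) :=
  let s := g.foldl pvBuildStepB
    ((PySem.Dict.empty : PySem.Dict Int (PySem.Dict Int Int)),
     (PySem.Dict.empty : PySem.Dict Int Int), ([] : List Int))
  let adj := s.1
  let idx := s.2.1
  let order := s.2.2
  let n := order.length
  let deg := order.foldl (fun d v => d.insert v ((pvRowA adj v).size : Int))
      (PySem.Dict.empty : PySem.Dict Int Int)
  let buckets := order.foldl (fun b v => pvBApp b (deg.getD v 0) (idx.getD v 0, v))
      (PySem.Dict.empty : PySem.Dict Int (List (Int × Int)))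
  let alive := PySem.Set.ofList order
  let fin := (PySem.List.pyRange 0 (n : Int) 1).foldl (pvStepB idx)
      (adj, deg, buckets, (0 : Int), alive, ([] : List (Int × List Int × List Int)))
  let trace := fin.2.2.2.2.2
  let phi := (PySem.List.enumerate trace 1).foldl (fun phi q => phi.insert q.2.1 q.1)
      (PySem.Dict.empty : PySem.Dict Int Int)
  let blp := trace.foldl (fun blp t =>
      (blp.1.insert t.1 (t.1 :: t.2.1), blp.2.1.insert t.1 ((0:Int) :: t.2.2),
       blp.2.2.insert t.1 (PySem.List.min? (t.2.1.filter (fun u => u != t.1))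
         (fun x => phi.getD x 0))))
    ((PySem.Dict.empty : PySem.Dict Int (List Int)),
     (PySem.Dict.empty : PySem.Dict Int (List Int)),
     (PySem.Dict.empty : PySem.Dict Int (Option Int)))
  (blp.1.items, blp.2.1.items, blp.2.2.items, phi.items)

theorem pvB_eq (g : List (Int × List Int)) : naive_dp_tree_decomposition_alt g = pvB g := rfl

set_option maxHeartbeats 3200000 in
theorem pvAB (g : List (Int × List Int)) (hPre : ∀ q ∈ g, q.1 ∉ q.2) : pvA g = pvB g := by
  have hpre' : ∀ q ∈ g, ∀ v ∈ q.2, v ≠ q.1 := by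
    intro q hq v hv he
    exact hPre q hq (he ▸ hv)
  obtain ⟨b1, b2, bI0, bW, bX⟩ := pvBuildAB g hpre'
  simp only [pvA, pvB]
  rw [b1, b2]
  set HA := g.foldl pvBuildStepA PySem.Dict.empty with hHA
  set idxB := (g.foldl pvBuildStepB
    (PySem.Dict.empty, PySem.Dict.empty, ([] : List Int))).2.1 with hidxB
  set degB := HA.keys.foldl (fun d v => d.insert v ((pvRowA HA v).size : Int))
    (PySem.Dict.empty : PySem.Dict Int Int) with hdegBdef
  set buckets0 := HA.keys.foldl (fun b v => pvBApp b (degB.getD v 0) (idxB.getD v 0, v))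
    (PySem.Dict.empty : PySem.Dict Int (List (Int × Int))) with hbk0
  have hdeg : ∀ u ∈ HA.keys, degB.getD u 0 = ((pvRowA HA u).size : Int) := pvDegBuild HA bI0.1
  have hIA : pvInv HA degB := ⟨bI0.1, hdeg, bI0.2.1, bI0.2.2.1, bI0.2.2.2.1, bI0.2.2.2.2⟩
  have hcomp0 : ∀ u ∈ HA.keys, (idxB.getD u 0, u) ∈ buckets0.getD (degB.getD u 0) [] := by
    intro u hu
    exact pvBucketsBuild degB idxB HA.keys PySem.Dict.empty u hu
  have hp00 : ∀ u ∈ HA.keys, (0:Int) ≤ degB.getD u 0 := by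
    intro u hu
    rw [hdeg u hu]
    positivity
  have hof : PySem.Set.ofList HA.keys = HA.keys := PySem.Set.ofList_eq_self_of_nodup _ bI0.1
  rw [hof]
  have hiter : (PySem.List.pyRange 0 ((HA.keys.length : Nat) : Int) 1).foldl (pvStepB idxB)
      (HA, degB, buckets0, (0:Int), HA.keys, ([] : List (Int × List Int × List Int)))
      = pvIter (fun s => pvStepB idxB s 0) HA.keys.length
        (HA, degB, buckets0, (0:Int), HA.keys, []) := by
    rw [pvFoldl_iter (fun s => pvStepB idxB s 0) (pvStepB idxB) (fun s a => rfl), pvRange_len]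
  rw [hiter]
  have hrange : PySem.List.pyRange 1 ((HA.keys.length : Int) + 1) 1
      = PySem.List.pyRange ((([] : List (Int × List Int × List Int)).length : Int) + 1)
        ((([] : List (Int × List Int × List Int)).length : Int) + 1 + (HA.keys.length : Int)) 1 := by
    norm_num
    rw [add_comm]
  rw [hrange]
  obtain ⟨hb, hl, hp, hnodup, hws⟩ := pvLoopB_sim idxB HA.keys.length HA degB buckets0 0
    PySem.Dict.empty PySem.Dict.empty PySem.Dict.empty [] hIA rfl bX.1 hcomp0 hp00 le_rfl
    rfl rfl rfl (by intro t ht; cases ht) (by simp) (by intro t ht; cases ht)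
  set TT := (pvIter (fun s => pvStepB idxB s 0) HA.keys.length
    (HA, degB, buckets0, (0:Int), HA.keys, ([] : List (Int × List Int × List Int)))).2.2.2.2.2 with hTT
  set stA := (PySem.List.pyRange ((([] : List (Int × List Int × List Int)).length : Int) + 1)
        ((([] : List (Int × List Int × List Int)).length : Int) + 1 + (HA.keys.length : Int)) 1).foldl
      pvStepA (HA, PySem.Dict.empty, PySem.Dict.empty, PySem.Dict.empty) with hstA
  -- keys of the output dicts
  have hTfst : (stA.2.1).keys = TT.map (fun t => t.1) := by
    rw [pvKeys_eq_map_fst _ hb, List.map_map]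
    rfl
  have hlamxk : (stA.2.2.1).keys = TT.map (fun t => t.1) := by
    rw [pvKeys_eq_map_fst _ hl, List.map_map]
    rfl
  have hbagnd : (stA.2.1).keys.Nodup := by rw [hTfst]; exact hnodup
  have hlamnd : (stA.2.2.1).keys.Nodup := by rw [hlamxk]; exact hnodup
  -- phi dicts agree
  have hphiBit : ((PySem.List.enumerate TT 1).foldl (fun phi q => phi.insert q.2.1 q.1)
      (PySem.Dict.empty : PySem.Dict Int Int)).items
      = (PySem.List.enumerate TT 1).map (fun q => (q.2.1, q.1)) := by
    have := PySem.Dict.items_foldl_insert_fresh (PySem.List.enumerate TT 1)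
      (fun q => q.2.1) (fun q => q.1) PySem.Dict.empty
      (fun a _ => PySem.Dict.contains_empty _)
      (by
        have hcomp : (PySem.List.enumerate TT 1).map (fun q => q.2.1)
            = TT.map (fun t => t.1) := by
          calc (PySem.List.enumerate TT 1).map (fun q => q.2.1)
              = ((PySem.List.enumerate TT 1).map (fun q => q.2)).map (fun t => t.1) := by
                rw [List.map_map]; rfl
            _ = TT.map (fun t => t.1) := by rw [PySem.List.map_snd_enumerate]
        rw [hcomp]
        exact hnodup)
    simpa using this
  have hphiAB : stA.2.2.2 = (PySem.List.enumerate TT 1).foldl (fun phi q => phi.insert q.2.1 q.1)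
      (PySem.Dict.empty : PySem.Dict Int Int) := by
    apply PySem.Dict.ext
    rw [hp, hphiBit]
  -- parent pass
  have hbody : (fun (par : PySem.Dict Int (Option Int)) (q : Int × List Int) =>
      if 1 < q.2.length then
        match PySem.List.min? (q.2.filter (fun u => u != q.1)) (fun x => (stA.2.2.2).getD x 0) with
        | some up => par.insert q.1 (some up)
        | none => par.insert q.1 none
      else par.insert q.1 none)
      = (fun par q => par.insert q.1 (pvParentVal (stA.2.2.2) q.1 q.2)) := by
    funext par q
    unfold pvParentVal
    by_cases h : 1 < q.2.length
    · rw [if_pos h, if_pos h]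
      rcases hm : PySem.List.min? (q.2.filter (fun u => u != q.1))
        (fun x => (stA.2.2.2).getD x 0) with _ | m <;> rfl
    · rw [if_neg h, if_neg h]
  rw [hbody]
  have hparent0 : (stA.2.1).keys.foldl (fun par v => par.insert v (none : Option Int))
      (PySem.Dict.empty : PySem.Dict Int (Option Int))
      = PySem.Dict.mk ([] ++ (stA.2.1).items.map (fun q => (q.1, (none : Option Int)))) := by
    apply PySem.Dict.ext
    have h := PySem.Dict.items_foldl_insert_fresh (stA.2.1).keys (fun x => x)
      (fun _ => (none : Option Int)) PySem.Dict.empty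
      (fun a _ => PySem.Dict.contains_empty _) (by simpa using hbagnd)
    rw [h]
    show [] ++ ((stA.2.1).items.map (fun q => q.1)).map (fun x => (x, (none : Option Int)))
      = [] ++ (stA.2.1).items.map (fun q => (q.1, (none : Option Int)))
    rw [List.map_map]
    rfl
  rw [hparent0]
  have hparent := pvOverwriteFold (fun v bag => pvParentVal (stA.2.2.2) v bag)
    (none : Option Int) (stA.2.1).items []
    (by
      have h5 : (stA.2.1).items.map (fun q => q.1) = (stA.2.1).keys := rfl
      rw [h5]; exact hbagnd)
    (by intro q hq; cases hq)
  rw [hparent]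
  -- B's output dicts
  have hblp1 : (TT.foldl (fun blp t =>
      (blp.1.insert t.1 (t.1 :: t.2.1), blp.2.1.insert t.1 ((0:Int) :: t.2.2),
       blp.2.2.insert t.1 (PySem.List.min? (t.2.1.filter (fun u => u != t.1))
         (fun x => ((PySem.List.enumerate TT 1).foldl (fun phi q => phi.insert q.2.1 q.1)
            (PySem.Dict.empty : PySem.Dict Int Int)).getD x 0))))
      ((PySem.Dict.empty : PySem.Dict Int (List Int)),
       (PySem.Dict.empty : PySem.Dict Int (List Int)),
       (PySem.Dict.empty : PySem.Dict Int (Option Int)))).1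
      = TT.foldl (fun d t => d.insert t.1 (t.1 :: t.2.1)) PySem.Dict.empty := by
    exact pvFoldl_fst TT _ _ (fun s a => rfl) _
  have hblp2 : (TT.foldl (fun blp t =>
      (blp.1.insert t.1 (t.1 :: t.2.1), blp.2.1.insert t.1 ((0:Int) :: t.2.2),
       blp.2.2.insert t.1 (PySem.List.min? (t.2.1.filter (fun u => u != t.1))
         (fun x => ((PySem.List.enumerate TT 1).foldl (fun phi q => phi.insert q.2.1 q.1)
            (PySem.Dict.empty : PySem.Dict Int Int)).getD x 0))))
      ((PySem.Dict.empty : PySem.Dict Int (List Int)),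
       (PySem.Dict.empty : PySem.Dict Int (List Int)),
       (PySem.Dict.empty : PySem.Dict Int (Option Int)))).2
      = TT.foldl (fun d2 t =>
          (d2.1.insert t.1 ((0:Int) :: t.2.2),
           d2.2.insert t.1 (PySem.List.min? (t.2.1.filter (fun u => u != t.1))
             (fun x => ((PySem.List.enumerate TT 1).foldl (fun phi q => phi.insert q.2.1 q.1)
                (PySem.Dict.empty : PySem.Dict Int Int)).getD x 0))))
          (PySem.Dict.empty, PySem.Dict.empty) := by
    exact pvFoldl_snd TT _ _ (fun s a => rfl) _
  rw [hblp1, hblp2]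
  rw [pvFoldl_fst TT (fun d t => d.insert t.1 ((0:Int) :: t.2.2)) _ (fun s a => rfl) _]
  rw [pvFoldl_snd TT (fun d t => d.insert t.1 (PySem.List.min? (t.2.1.filter (fun u => u != t.1))
             (fun x => ((PySem.List.enumerate TT 1).foldl (fun phi q => phi.insert q.2.1 q.1)
                (PySem.Dict.empty : PySem.Dict Int Int)).getD x 0))) _ (fun s a => rfl) _]
  have hBbag : (TT.foldl (fun d t => d.insert t.1 (t.1 :: t.2.1)) PySem.Dict.empty).items
      = TT.map (fun t => (t.1, t.1 :: t.2.1)) := by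
    have := PySem.Dict.items_foldl_insert_fresh TT (fun t => t.1) (fun t => t.1 :: t.2.1)
      PySem.Dict.empty (fun a _ => PySem.Dict.contains_empty _) hnodup
    simpa using this
  have hBlam : (TT.foldl (fun d t => d.insert t.1 ((0:Int) :: t.2.2)) PySem.Dict.empty).items
      = TT.map (fun t => (t.1, (0:Int) :: t.2.2)) := by
    have := PySem.Dict.items_foldl_insert_fresh TT (fun t => t.1) (fun t => (0:Int) :: t.2.2)
      PySem.Dict.empty (fun a _ => PySem.Dict.contains_empty _) hnodup
    simpa using this
  have hBpar : (TT.foldl (fun d t => d.insert t.1 (PySem.List.min? (t.2.1.filter (fun u => u != t.1))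
             (fun x => ((PySem.List.enumerate TT 1).foldl (fun phi q => phi.insert q.2.1 q.1)
                (PySem.Dict.empty : PySem.Dict Int Int)).getD x 0))) PySem.Dict.empty).items
      = TT.map (fun t => (t.1, PySem.List.min? (t.2.1.filter (fun u => u != t.1))
             (fun x => ((PySem.List.enumerate TT 1).foldl (fun phi q => phi.insert q.2.1 q.1)
                (PySem.Dict.empty : PySem.Dict Int Int)).getD x 0))) := by
    have := PySem.Dict.items_foldl_insert_fresh TT (fun t => t.1)
      (fun t => PySem.List.min? (t.2.1.filter (fun u => u != t.1))
             (fun x => ((PySem.List.enumerate TT 1).foldl (fun phi q => phi.insert q.2.1 q.1)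
                (PySem.Dict.empty : PySem.Dict Int Int)).getD x 0))
      PySem.Dict.empty (fun a _ => PySem.Dict.contains_empty _) hnodup
    simpa using this
  -- parent items agree
  have hparfinal : [] ++ (TT.map (fun t => (t.1, t.1 :: t.2.1))).map
        (fun q => (q.1, pvParentVal (stA.2.2.2) q.1 q.2))
      = TT.map (fun t => (t.1, PySem.List.min? (t.2.1.filter (fun u => u != t.1))
             (fun x => ((PySem.List.enumerate TT 1).foldl (fun phi q => phi.insert q.2.1 q.1)
                (PySem.Dict.empty : PySem.Dict Int Int)).getD x 0))) := by
    rw [List.nil_append, List.map_map]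
    apply List.map_congr_left
    intro t _
    show (t.1, pvParentVal (stA.2.2.2) t.1 (t.1 :: t.2.1)) = _
    rw [pvParentVal_eq, hphiAB]
  -- the zip rewrite pass is the identity
  have hzip : (stA.2.1).keys.foldl (fun bl v =>
      (bl.1.insert v (((bl.1.getD v []).zip (bl.2.getD v [])).map Prod.fst),
       bl.2.insert v (((bl.1.getD v []).zip (bl.2.getD v [])).map Prod.snd)))
      (stA.2.1, stA.2.2.1) = (stA.2.1, stA.2.2.1) := by
    apply pvFoldl_id
    intro v hv
    rw [hTfst] at hv
    rcases List.mem_map.1 hv with ⟨t, ht, rfl⟩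
    have hbagit : (t.1, t.1 :: t.2.1) ∈ (stA.2.1).items := by
      rw [hb]; exact List.mem_map.2 ⟨t, ht, rfl⟩
    have hlamit : (t.1, (0:Int) :: t.2.2) ∈ (stA.2.2.1).items := by
      rw [hl]; exact List.mem_map.2 ⟨t, ht, rfl⟩
    have hbagD : (stA.2.1).getD t.1 [] = t.1 :: t.2.1 :=
      PySem.Dict.getD_of_mem_items _ hbagit hbagnd []
    have hlamD : (stA.2.2.1).getD t.1 [] = (0:Int) :: t.2.2 :=
      PySem.Dict.getD_of_mem_items _ hlamit hlamnd []
    rw [hbagD, hlamD]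
    have hlen : (t.1 :: t.2.1).length = ((0:Int) :: t.2.2).length := by
      simp [hws t ht]
    rw [List.map_fst_zip (le_of_eq hlen), List.map_snd_zip (le_of_eq hlen.symm)]
    rw [pvDict_insert_eq_self _ _ _ hbagnd (PySem.Dict.get?_of_mem_items _ hbagit hbagnd),
      pvDict_insert_eq_self _ _ _ hlamnd (PySem.Dict.get?_of_mem_items _ hlamit hlamnd)]
  rw [hzip]
  show ((stA.2.1).items, (stA.2.2.1).items, _, (stA.2.2.2).items) = _
  rw [hb, hl, hp, hBbag, hBlam, hBpar, hphiBit]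
  beta_reduce
  rw [hparfinal]

-- ===== VERDICT (by name: the statement is the Claim_ definition above) =====
theorem naive_dp_tree_decomposition_spec : Claim_equal_naive_dp_tree_decomposition := by
  intro g _hDom hPre
  show naive_dp_tree_decomposition g = naive_dp_tree_decomposition_alt g
  rw [pvA_eq, pvB_eq]
  exact pvAB g hPre
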